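-- pv_equiv track=rewrite | github.com/uriya16/S-DBPA | create_sdbpa_report.py | clean_latex
-- ===== SOURCE A (Python) =====
-- def clean_latex(text):
--     """
--     Simulate LaTeX rendering by replacing common patterns with readable text
--     for inline usage where images are difficult.
--     """
--     # 1. Replace specific commands first (longer matches first)
--     replacements = [
--         (r"\theta", "theta"),
--         (r"\phi", "phi"),
--         (r"\psi", "psi"),
--         (r"\hat{\omega}", "omega_hat"), # catch before omega
--         (r"\omega", "omega"),
--         (r"\mathcal{S}", "S"),
--         (r"\mathcal{P}_{sem}", "P_sem"),
--         (r"\sim", "~"),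
--         (r"\le", "<="),
--         (r"\ge", ">="),
--         (r"\in", "in"),
--         (r"\cdot", "."),
--         (r"\forall", "For all"),
--     ]
--     for old, new in replacements:
--         text = text.replace(old, new)
--
--     # 2. Clean syntax chars
--     # Remove braces {}
--     text = text.replace("{", "").replace("}", "")
--     # Remove backslashes remaining (e.g. from \_ or just structure)
--     text = text.replace("\\", "")
--     # Keep subscripts/superscripts generally readable as _ and ^
--
--     # 3. Remove Math Mode delimiters
--     text = text.replace("$", "")
--
--     return text
-- ===== SOURCE B (Python) =====
-- def clean_latex(text):
--     """
--     One-pass table-driven scanner: at each position take the first matching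
--     pattern from a single ordered table (specific commands first, bare
--     syntax-character strips last) instead of 17 sequential whole-string passes.
--     """
--     table = [
--         ("\\theta", "theta"),
--         ("\\phi", "phi"),
--         ("\\psi", "psi"),
--         ("\\hat{\\omega}", "omega_hat"),
--         ("\\omega", "omega"),
--         ("\\mathcal{S}", "S"),
--         ("\\mathcal{P}_{sem}", "P_sem"),
--         ("\\sim", "~"),
--         ("\\le", "<="),
--         ("\\ge", ">="),
--         ("\\in", "in"),
--         ("\\cdot", "."),
--         ("\\forall", "For all"),
--         ("{", ""),
--         ("}", ""),
--         ("\\", ""),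
--         ("$", ""),
--     ]
--     out = []
--     i = 0
--     n = len(text)
--     while i < n:
--         m = next(((p, r) for (p, r) in table if text.startswith(p, i)), None)
--         if m is None:
--             out.append(text[i])
--             i += 1
--         else:
--             out.append(m[1])
--             i += len(m[0])
--     return "".join(out)
-- ===== Notes on version B (the rewrite author's own statement) =====
-- stated objective: alternative
-- what changed: Replaces A's 17 sequential whole-string str.replace passes by a single left-to-right scan driven by one ordered pattern table (specific commands first, bare brace/backslash/$ strips last), taking the first matching entry at each position.
-- intended difference: On texts containing the 10-character substring backslash-c-d-o-backslash-t-h-e-t-a, A's first pass rewrites the trailing theta command to the word theta, whose leading t merges with the preceding backslash-cdo into a new cdot command occurrence that a later pass replaces by a dot (on the witness A returns .heta); B scans the original text once and returns cdotheta, the intended reading of the original commands. — e.g. on clean_latex("\\cdo\\theta"): A returns ".heta", B returns "cdotheta"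
import Mathlib
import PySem

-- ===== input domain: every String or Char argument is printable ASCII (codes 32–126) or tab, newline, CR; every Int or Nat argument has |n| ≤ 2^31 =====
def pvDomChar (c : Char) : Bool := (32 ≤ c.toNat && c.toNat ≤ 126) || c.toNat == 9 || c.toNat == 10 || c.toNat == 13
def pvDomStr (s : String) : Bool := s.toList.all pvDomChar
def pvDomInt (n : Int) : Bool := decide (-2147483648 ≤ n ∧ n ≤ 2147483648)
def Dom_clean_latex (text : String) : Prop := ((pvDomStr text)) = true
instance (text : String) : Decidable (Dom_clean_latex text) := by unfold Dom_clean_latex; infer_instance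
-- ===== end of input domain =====

-- B replaces A's 17 sequential whole-string replace passes by a single left-to-right
-- scan over one ordered pattern table (commands first, bare {,},\,$ strips last).
-- Intended difference (D_): on texts containing "\cdo\theta", A's first pass turns
-- "\theta" into "theta" whose 't' merges with the preceding "\cdo" into a new "\cdot"
-- that A's later pass replaces by "." (e.g. A "\cdo\theta" = ".heta"); B reads the
-- original text only and returns "cdotheta", the intended reading.

-- ===== PORT A =====
def pvRepls : List (String × String) := [
  ("\\theta", "theta"),
  ("\\phi", "phi"),
  ("\\psi", "psi"),
  ("\\hat{\\omega}", "omega_hat"),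
  ("\\omega", "omega"),
  ("\\mathcal{S}", "S"),
  ("\\mathcal{P}_{sem}", "P_sem"),
  ("\\sim", "~"),
  ("\\le", "<="),
  ("\\ge", ">="),
  ("\\in", "in"),
  ("\\cdot", "."),
  ("\\forall", "For all")]

def clean_latex (text : String) : String :=
  let text := pvRepls.foldl (fun acc pr => PySem.Str.replace acc pr.1 pr.2) text
  let text := PySem.Str.replace text "{" ""
  let text := PySem.Str.replace text "}" ""
  let text := PySem.Str.replace text "\\" ""
  let text := PySem.Str.replace text "$" ""
  text

-- ===== PORT B =====
def pvTable : List (List Char × List Char) := [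
  (['\\', 't', 'h', 'e', 't', 'a'], ['t', 'h', 'e', 't', 'a']),
  (['\\', 'p', 'h', 'i'], ['p', 'h', 'i']),
  (['\\', 'p', 's', 'i'], ['p', 's', 'i']),
  (['\\', 'h', 'a', 't', '{', '\\', 'o', 'm', 'e', 'g', 'a', '}'], ['o', 'm', 'e', 'g', 'a', '_', 'h', 'a', 't']),
  (['\\', 'o', 'm', 'e', 'g', 'a'], ['o', 'm', 'e', 'g', 'a']),
  (['\\', 'm', 'a', 't', 'h', 'c', 'a', 'l', '{', 'S', '}'], ['S']),
  (['\\', 'm', 'a', 't', 'h', 'c', 'a', 'l', '{', 'P', '}', '_', '{', 's', 'e', 'm', '}'], ['P', '_', 's', 'e', 'm']),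
  (['\\', 's', 'i', 'm'], ['~']),
  (['\\', 'l', 'e'], ['<', '=']),
  (['\\', 'g', 'e'], ['>', '=']),
  (['\\', 'i', 'n'], ['i', 'n']),
  (['\\', 'c', 'd', 'o', 't'], ['.']),
  (['\\', 'f', 'o', 'r', 'a', 'l', 'l'], ['F', 'o', 'r', ' ', 'a', 'l', 'l']),
  (['{'], []),
  (['}'], []),
  (['\\'], []),
  (['$'], [])]

-- the scanner of Source B: at each position take the first matching table entry;
-- i += len(pat) is ported as dropping the head and then (len(pat) - 1) chars of the tail
def pvScan : List Char → List Char
  | [] => []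
  | c :: t =>
    match pvTable.findSome? (fun pr => if pr.1 <+: (c :: t) then some pr else none) with
    | some pr => pr.2 ++ pvScan (t.drop (pr.1.length - 1))
    | none => c :: pvScan t
termination_by s => s.length
decreasing_by
  all_goals simp

def clean_latex_alt (text : String) : String := String.ofList (pvScan text.toList)

-- ===== PRECONDITION & SPEC =====
-- On texts containing "\cdo\theta" A returns the spurious "." reading (its first pass
-- rewrites "\theta" to "theta", creating a new "\cdot" occurrence that a later pass
-- replaces), while B returns the text read from the original occurrences only.
def D_clean_latex (text : String) : Prop := PySem.Str.isIn "\\cdo\\theta" text = true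
instance (text : String) : Decidable (D_clean_latex text) := by unfold D_clean_latex; infer_instance

def Spec_clean_latex (text : String) (out : String) : Prop :=
  ¬ D_clean_latex text → out = clean_latex_alt text
instance (text : String) (out : String) : Decidable (Spec_clean_latex text out) := by
  unfold Spec_clean_latex; infer_instance

def pvDiffWitness_clean_latex : String := "\\cdo\\theta"
def pvDiffWitnessOut_clean_latex : String × String := (".heta", "cdotheta")

-- ===== CLAIM =====
def Claim_unchanged_clean_latex : Prop :=
  ∀ (text : String), Dom_clean_latex text → Spec_clean_latex text (clean_latex text)
def Claim_changed_clean_latex : Prop :=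
  Dom_clean_latex (pvDiffWitness_clean_latex) ∧ D_clean_latex (pvDiffWitness_clean_latex) ∧
  clean_latex (pvDiffWitness_clean_latex) = pvDiffWitnessOut_clean_latex.1 ∧
  clean_latex_alt (pvDiffWitness_clean_latex) = pvDiffWitnessOut_clean_latex.2 ∧
  pvDiffWitnessOut_clean_latex.1 ≠ pvDiffWitnessOut_clean_latex.2
def Claim_exact_clean_latex : Prop :=
  ∀ (text : String), Dom_clean_latex text → D_clean_latex text →
    clean_latex text ≠ clean_latex_alt text

-- ===== LEMMAS AND PROOFS =====

-- structural model of Python str.replace for a nonempty pattern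
def myRepl (o : Char) (ol nw : List Char) : List Char → List Char
  | [] => []
  | c :: t =>
    if (o :: ol) <+: (c :: t) then nw ++ myRepl o ol nw (t.drop ol.length)
    else c :: myRepl o ol nw t
termination_by s => s.length

theorem go_spec (o : Char) (ol nw : List Char) :
    ∀ (fuel : Nat) (l acc : List Char), l.length ≤ fuel →
      PySem.Chars.replace.go (o :: ol) nw fuel l acc = acc.reverse ++ myRepl o ol nw l := by
  intro fuel
  induction fuel with
  | zero =>
    intro l acc h
    match l with
    | [] => simp [PySem.Chars.replace.go, myRepl]
    | c :: t => simp at h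
  | succ n ih =>
    intro l acc h
    match l with
    | [] => simp [PySem.Chars.replace.go, myRepl]
    | c :: t =>
      rw [PySem.Chars.replace.go]
      by_cases hp : (o :: ol) <+: (c :: t)
      · have hb : (o :: ol).isPrefixOf (c :: t) = true := List.isPrefixOf_iff_prefix.mpr hp
        rw [if_pos hb]
        have hlen : (List.drop (o :: ol).length (c :: t)).length ≤ n := by
          simp at h ⊢; omega
        rw [ih _ _ hlen]
        simp [myRepl, hp]
      · have hb : ¬ ((o :: ol).isPrefixOf (c :: t) = true) :=
          fun hcon => hp (List.isPrefixOf_iff_prefix.mp hcon)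
        rw [if_neg hb]
        have hlen : t.length ≤ n := by simp at h; omega
        rw [ih _ _ hlen]
        simp [myRepl, hp]

theorem replace_eq_myRepl (o : Char) (ol nw s : List Char) :
    PySem.Chars.replace s (o :: ol) nw = myRepl o ol nw s := by
  rw [PySem.Chars.replace]
  simp [go_spec o ol nw s.length s [] (le_refl _)]

def M1 (t : List Char) : List Char := myRepl '\\' ['t', 'h', 'e', 't', 'a'] ['t', 'h', 'e', 't', 'a'] (t)
def M2 (t : List Char) : List Char := myRepl '\\' ['p', 'h', 'i'] ['p', 'h', 'i'] (M1 t)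
def M3 (t : List Char) : List Char := myRepl '\\' ['p', 's', 'i'] ['p', 's', 'i'] (M2 t)
def M4 (t : List Char) : List Char := myRepl '\\' ['h', 'a', 't', '{', '\\', 'o', 'm', 'e', 'g', 'a', '}'] ['o', 'm', 'e', 'g', 'a', '_', 'h', 'a', 't'] (M3 t)
def M5 (t : List Char) : List Char := myRepl '\\' ['o', 'm', 'e', 'g', 'a'] ['o', 'm', 'e', 'g', 'a'] (M4 t)
def M6 (t : List Char) : List Char := myRepl '\\' ['m', 'a', 't', 'h', 'c', 'a', 'l', '{', 'S', '}'] ['S'] (M5 t)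
def M7 (t : List Char) : List Char := myRepl '\\' ['m', 'a', 't', 'h', 'c', 'a', 'l', '{', 'P', '}', '_', '{', 's', 'e', 'm', '}'] ['P', '_', 's', 'e', 'm'] (M6 t)
def M8 (t : List Char) : List Char := myRepl '\\' ['s', 'i', 'm'] ['~'] (M7 t)
def M9 (t : List Char) : List Char := myRepl '\\' ['l', 'e'] ['<', '='] (M8 t)
def M10 (t : List Char) : List Char := myRepl '\\' ['g', 'e'] ['>', '='] (M9 t)
def M11 (t : List Char) : List Char := myRepl '\\' ['i', 'n'] ['i', 'n'] (M10 t)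
def M12 (t : List Char) : List Char := myRepl '\\' ['c', 'd', 'o', 't'] ['.'] (M11 t)
def M13 (t : List Char) : List Char := myRepl '\\' ['f', 'o', 'r', 'a', 'l', 'l'] ['F', 'o', 'r', ' ', 'a', 'l', 'l'] (M12 t)
def AC (t : List Char) : List Char :=
  myRepl '$' [] [] (myRepl '\\' [] [] (myRepl '}' [] [] (myRepl '{' [] [] (M13 t))))

theorem clean_latex_eq_AC (text : String) :
    clean_latex text = String.ofList (AC text.toList) := by
  simp [clean_latex, pvRepls, List.foldl, PySem.Str.replace, replace_eq_myRepl,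
        AC, M1, M2, M3, M4, M5, M6, M7, M8, M9, M10, M11, M12, M13]

theorem clean_latex_alt_eq (text : String) :
    clean_latex_alt text = String.ofList (pvScan text.toList) := rfl

theorem myRepl_cons_not {o : Char} {ol nw : List Char} {c : Char} {t : List Char}
    (h : ¬ (o :: ol) <+: (c :: t)) :
    myRepl o ol nw (c :: t) = c :: myRepl o ol nw t := by
  rw [myRepl, if_neg h]

theorem prefix_append_cases : ∀ {a w v : List Char}, w <+: a ++ v → w <+: a ∨ a <+: w := by
  intro a
  induction a with
  | nil => intro w v _; right; exact List.nil_prefix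
  | cons x a' ih =>
    intro w v h
    match w with
    | [] => left; exact List.nil_prefix
    | w0 :: wr =>
      obtain ⟨h1, h2⟩ := List.cons_prefix_cons.mp h
      subst h1
      rcases ih h2 with h3 | h3
      · left; exact List.cons_prefix_cons.mpr ⟨rfl, h3⟩
      · right; exact List.cons_prefix_cons.mpr ⟨rfl, h3⟩

def sufOK (w nw : List Char) : Bool :=
  w.tails.all (fun w' => w'.isEmpty || (!(w'.isPrefixOf nw) && !(nw.isPrefixOf w')))

theorem sufOK_suffix {w w' nw : List Char} (h : sufOK w nw = true) (hs : w' <:+ w) :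
    sufOK w' nw = true := by
  unfold sufOK at h ⊢
  rw [List.all_eq_true] at h ⊢
  intro x hx
  exact h x (((List.mem_tails _ _).mpr (((List.mem_tails _ _).mp hx).trans hs)))

theorem sufOK_no_mix {w nw : List Char} (h : sufOK w nw = true) (hw : w ≠ []) :
    ¬ w <+: nw ∧ ¬ nw <+: w := by
  unfold sufOK at h
  rw [List.all_eq_true] at h
  have := h w ((List.mem_tails _ _).mpr (List.suffix_refl w))
  have hwe : w.isEmpty = false := by
    cases w
    · exact absurd rfl hw
    · rfl
  rw [hwe, Bool.false_or, Bool.and_eq_true, Bool.not_eq_true', Bool.not_eq_true'] at this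
  obtain ⟨ha, hb⟩ := this
  exact ⟨fun hx => (Bool.eq_false_iff.mp ha) (List.isPrefixOf_iff_prefix.mpr hx),
        fun hx => (Bool.eq_false_iff.mp hb) (List.isPrefixOf_iff_prefix.mpr hx)⟩

theorem pres1 : ∀ (n : Nat) {o : Char} {ol nw w u : List Char}, u.length ≤ n →
    sufOK w nw = true → ¬ w <+: u → ¬ w <+: myRepl o ol nw u := by
  intro n
  induction n with
  | zero =>
    intro o ol nw w u hl _ h
    match u with
    | [] => simpa [myRepl] using h
    | c :: u' => simp at hl
  | succ n ih =>
    intro o ol nw w u hl hC h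
    have hw : w ≠ [] := by rintro rfl; exact h (List.nil_prefix)
    match u with
    | [] => simpa [myRepl] using h
    | c :: u' =>
      by_cases hp : (o :: ol) <+: (c :: u')
      · rw [myRepl, if_pos hp]
        intro hcon
        rcases prefix_append_cases hcon with h1 | h1
        · exact (sufOK_no_mix hC hw).1 h1
        · exact (sufOK_no_mix hC hw).2 h1
      · rw [myRepl, if_neg hp]
        match w, hw with
        | w0 :: wr, _ =>
          intro hcon
          obtain ⟨h1, h2⟩ := List.cons_prefix_cons.mp hcon
          subst h1
          have h' : ¬ wr <+: u' := fun hx => h (List.cons_prefix_cons.mpr ⟨rfl, hx⟩)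
          have hl' : u'.length ≤ n := by simp at hl; omega
          exact ih hl' (sufOK_suffix hC (List.suffix_cons _ _)) h' h2

def sufOKst (w nw : List Char) : Bool :=
  w.tails.all (fun w' => w'.isEmpty || w'.length == w.length ||
    (!(w'.isPrefixOf nw) && !(nw.isPrefixOf w')))

theorem sufOKst_to_sufOK {w w' nw : List Char} (h : sufOKst w nw = true)
    (hs : w' <:+ w) (hlt : w'.length < w.length) : sufOK w' nw = true := by
  unfold sufOKst at h
  unfold sufOK
  rw [List.all_eq_true] at h ⊢
  intro x hx
  have hxw : x <:+ w := ((List.mem_tails _ _).mp hx).trans hs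
  have hxl : x.length ≤ w'.length := ((List.mem_tails _ _).mp hx).length_le
  have := h x ((List.mem_tails _ _).mpr hxw)
  rcases Bool.or_eq_true_iff.mp this with h1 | h1
  · rcases Bool.or_eq_true_iff.mp h1 with h2 | h2
    · simp [h2]
    · exfalso; have : x.length = w.length := by simpa using h2
      omega
  · simp [h1]

theorem pres2 {o : Char} {ol nw w u : List Char} (hC : sufOKst w nw = true)
    (hp4 : ¬ (o :: ol) <+: u) (h : ¬ w <+: u) : ¬ w <+: myRepl o ol nw u := by
  have hw : w ≠ [] := by rintro rfl; exact h (List.nil_prefix)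
  match u with
  | [] => simpa [myRepl] using h
  | c :: u' =>
    rw [myRepl, if_neg hp4]
    match w, hw with
    | w0 :: wr, _ =>
      intro hcon
      obtain ⟨h1, h2⟩ := List.cons_prefix_cons.mp hcon
      subst h1
      have h' : ¬ wr <+: u' := fun hx => h (List.cons_prefix_cons.mpr ⟨rfl, hx⟩)
      have hok : sufOK wr nw = true :=
        sufOKst_to_sufOK hC (List.suffix_cons _ _) (by simp)
      exact pres1 u'.length (le_refl _) hok h' h2

theorem pres_t : ∀ {u : List Char}, ¬ ['t'] <+: u → ¬ ['\\', 't', 'h', 'e', 't', 'a'] <+: u →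
    ¬ ['t'] <+: myRepl '\\' ['t', 'h', 'e', 't', 'a'] ['t', 'h', 'e', 't', 'a'] u := by
  intro u h h2
  match u with
  | [] => simpa [myRepl] using h
  | c :: u' =>
    rw [myRepl, if_neg h2]
    intro hcon
    exact h (List.cons_prefix_cons.mpr
      ⟨(List.cons_prefix_cons.mp hcon).1, List.nil_prefix⟩)

theorem pres_ot : ∀ {u : List Char}, ¬ ['o', 't'] <+: u → ¬ (['o'] ++ ['\\', 't', 'h', 'e', 't', 'a']) <+: u →
    ¬ ['o', 't'] <+: myRepl '\\' ['t', 'h', 'e', 't', 'a'] ['t', 'h', 'e', 't', 'a'] u := by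
  intro u h h2
  match u with
  | [] => simpa [myRepl] using h
  | c :: u' =>
    by_cases hp : ['\\', 't', 'h', 'e', 't', 'a'] <+: (c :: u')
    · rw [myRepl, if_pos hp]
      intro hcon
      rcases prefix_append_cases hcon with h1 | h1 <;> simp [List.cons_prefix_cons] at h1
    · rw [myRepl, if_neg hp]
      intro hcon
      obtain ⟨h1, h2'⟩ := List.cons_prefix_cons.mp hcon
      subst h1
      have ha : ¬ ['t'] <+: u' := fun hx => h (List.cons_prefix_cons.mpr ⟨rfl, hx⟩)
      have hb : ¬ ['\\', 't', 'h', 'e', 't', 'a'] <+: u' := fun hx => h2 (by simpa [List.cons_prefix_cons] using hx)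
      exact pres_t ha hb h2'

theorem pres_dot : ∀ {u : List Char}, ¬ ['d', 'o', 't'] <+: u → ¬ (['d', 'o'] ++ ['\\', 't', 'h', 'e', 't', 'a']) <+: u →
    ¬ ['d', 'o', 't'] <+: myRepl '\\' ['t', 'h', 'e', 't', 'a'] ['t', 'h', 'e', 't', 'a'] u := by
  intro u h h2
  match u with
  | [] => simpa [myRepl] using h
  | c :: u' =>
    by_cases hp : ['\\', 't', 'h', 'e', 't', 'a'] <+: (c :: u')
    · rw [myRepl, if_pos hp]
      intro hcon
      rcases prefix_append_cases hcon with h1 | h1 <;> simp [List.cons_prefix_cons] at h1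
    · rw [myRepl, if_neg hp]
      intro hcon
      obtain ⟨h1, h2'⟩ := List.cons_prefix_cons.mp hcon
      subst h1
      have ha : ¬ ['o', 't'] <+: u' := fun hx => h (List.cons_prefix_cons.mpr ⟨rfl, hx⟩)
      have hb : ¬ (['o'] ++ ['\\', 't', 'h', 'e', 't', 'a']) <+: u' := fun hx => h2 (by simpa [List.cons_prefix_cons] using hx)
      exact pres_ot ha hb h2'

theorem pres_cdot : ∀ {u : List Char}, ¬ ['c', 'd', 'o', 't'] <+: u → ¬ (['c', 'd', 'o'] ++ ['\\', 't', 'h', 'e', 't', 'a']) <+: u →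
    ¬ ['c', 'd', 'o', 't'] <+: myRepl '\\' ['t', 'h', 'e', 't', 'a'] ['t', 'h', 'e', 't', 'a'] u := by
  intro u h h2
  match u with
  | [] => simpa [myRepl] using h
  | c :: u' =>
    by_cases hp : ['\\', 't', 'h', 'e', 't', 'a'] <+: (c :: u')
    · rw [myRepl, if_pos hp]
      intro hcon
      rcases prefix_append_cases hcon with h1 | h1 <;> simp [List.cons_prefix_cons] at h1
    · rw [myRepl, if_neg hp]
      intro hcon
      obtain ⟨h1, h2'⟩ := List.cons_prefix_cons.mp hcon
      subst h1
      have ha : ¬ ['d', 'o', 't'] <+: u' := fun hx => h (List.cons_prefix_cons.mpr ⟨rfl, hx⟩)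
      have hb : ¬ (['d', 'o'] ++ ['\\', 't', 'h', 'e', 't', 'a']) <+: u' := fun hx => h2 (by simpa [List.cons_prefix_cons] using hx)
      exact pres_dot ha hb h2'


theorem AC_pat1 (t : List Char) : AC (['\\', 't', 'h', 'e', 't', 'a'] ++ t) = ['t', 'h', 'e', 't', 'a'] ++ AC t := by
  simp [AC, M1, M2, M3, M4, M5, M6, M7, M8, M9, M10, M11, M12, M13, myRepl, List.cons_prefix_cons]
theorem Scan_pat1 (t : List Char) : pvScan (['\\', 't', 'h', 'e', 't', 'a'] ++ t) = ['t', 'h', 'e', 't', 'a'] ++ pvScan t := by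
  rw [show ['\\', 't', 'h', 'e', 't', 'a'] ++ t = '\\' :: 't' :: 'h' :: 'e' :: 't' :: 'a' :: t from rfl]
  simp [pvScan, pvTable, List.cons_prefix_cons]

theorem AC_pat2 (t : List Char) : AC (['\\', 'p', 'h', 'i'] ++ t) = ['p', 'h', 'i'] ++ AC t := by
  simp [AC, M1, M2, M3, M4, M5, M6, M7, M8, M9, M10, M11, M12, M13, myRepl, List.cons_prefix_cons]
theorem Scan_pat2 (t : List Char) : pvScan (['\\', 'p', 'h', 'i'] ++ t) = ['p', 'h', 'i'] ++ pvScan t := by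
  rw [show ['\\', 'p', 'h', 'i'] ++ t = '\\' :: 'p' :: 'h' :: 'i' :: t from rfl]
  simp [pvScan, pvTable, List.cons_prefix_cons]

theorem AC_pat3 (t : List Char) : AC (['\\', 'p', 's', 'i'] ++ t) = ['p', 's', 'i'] ++ AC t := by
  simp [AC, M1, M2, M3, M4, M5, M6, M7, M8, M9, M10, M11, M12, M13, myRepl, List.cons_prefix_cons]
theorem Scan_pat3 (t : List Char) : pvScan (['\\', 'p', 's', 'i'] ++ t) = ['p', 's', 'i'] ++ pvScan t := by
  rw [show ['\\', 'p', 's', 'i'] ++ t = '\\' :: 'p' :: 's' :: 'i' :: t from rfl]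
  simp [pvScan, pvTable, List.cons_prefix_cons]

theorem AC_pat4 (t : List Char) : AC (['\\', 'h', 'a', 't', '{', '\\', 'o', 'm', 'e', 'g', 'a', '}'] ++ t) = ['o', 'm', 'e', 'g', 'a', '_', 'h', 'a', 't'] ++ AC t := by
  simp [AC, M1, M2, M3, M4, M5, M6, M7, M8, M9, M10, M11, M12, M13, myRepl, List.cons_prefix_cons]
theorem Scan_pat4 (t : List Char) : pvScan (['\\', 'h', 'a', 't', '{', '\\', 'o', 'm', 'e', 'g', 'a', '}'] ++ t) = ['o', 'm', 'e', 'g', 'a', '_', 'h', 'a', 't'] ++ pvScan t := by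
  rw [show ['\\', 'h', 'a', 't', '{', '\\', 'o', 'm', 'e', 'g', 'a', '}'] ++ t = '\\' :: 'h' :: 'a' :: 't' :: '{' :: '\\' :: 'o' :: 'm' :: 'e' :: 'g' :: 'a' :: '}' :: t from rfl]
  simp [pvScan, pvTable, List.cons_prefix_cons]

theorem AC_pat5 (t : List Char) : AC (['\\', 'o', 'm', 'e', 'g', 'a'] ++ t) = ['o', 'm', 'e', 'g', 'a'] ++ AC t := by
  simp [AC, M1, M2, M3, M4, M5, M6, M7, M8, M9, M10, M11, M12, M13, myRepl, List.cons_prefix_cons]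
theorem Scan_pat5 (t : List Char) : pvScan (['\\', 'o', 'm', 'e', 'g', 'a'] ++ t) = ['o', 'm', 'e', 'g', 'a'] ++ pvScan t := by
  rw [show ['\\', 'o', 'm', 'e', 'g', 'a'] ++ t = '\\' :: 'o' :: 'm' :: 'e' :: 'g' :: 'a' :: t from rfl]
  simp [pvScan, pvTable, List.cons_prefix_cons]

theorem AC_pat6 (t : List Char) : AC (['\\', 'm', 'a', 't', 'h', 'c', 'a', 'l', '{', 'S', '}'] ++ t) = ['S'] ++ AC t := by
  simp [AC, M1, M2, M3, M4, M5, M6, M7, M8, M9, M10, M11, M12, M13, myRepl, List.cons_prefix_cons]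
theorem Scan_pat6 (t : List Char) : pvScan (['\\', 'm', 'a', 't', 'h', 'c', 'a', 'l', '{', 'S', '}'] ++ t) = ['S'] ++ pvScan t := by
  rw [show ['\\', 'm', 'a', 't', 'h', 'c', 'a', 'l', '{', 'S', '}'] ++ t = '\\' :: 'm' :: 'a' :: 't' :: 'h' :: 'c' :: 'a' :: 'l' :: '{' :: 'S' :: '}' :: t from rfl]
  simp [pvScan, pvTable, List.cons_prefix_cons]

theorem AC_pat7 (t : List Char) : AC (['\\', 'm', 'a', 't', 'h', 'c', 'a', 'l', '{', 'P', '}', '_', '{', 's', 'e', 'm', '}'] ++ t) = ['P', '_', 's', 'e', 'm'] ++ AC t := by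
  simp [AC, M1, M2, M3, M4, M5, M6, M7, M8, M9, M10, M11, M12, M13, myRepl, List.cons_prefix_cons]
theorem Scan_pat7 (t : List Char) : pvScan (['\\', 'm', 'a', 't', 'h', 'c', 'a', 'l', '{', 'P', '}', '_', '{', 's', 'e', 'm', '}'] ++ t) = ['P', '_', 's', 'e', 'm'] ++ pvScan t := by
  rw [show ['\\', 'm', 'a', 't', 'h', 'c', 'a', 'l', '{', 'P', '}', '_', '{', 's', 'e', 'm', '}'] ++ t = '\\' :: 'm' :: 'a' :: 't' :: 'h' :: 'c' :: 'a' :: 'l' :: '{' :: 'P' :: '}' :: '_' :: '{' :: 's' :: 'e' :: 'm' :: '}' :: t from rfl]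
  simp [pvScan, pvTable, List.cons_prefix_cons]

theorem AC_pat8 (t : List Char) : AC (['\\', 's', 'i', 'm'] ++ t) = ['~'] ++ AC t := by
  simp [AC, M1, M2, M3, M4, M5, M6, M7, M8, M9, M10, M11, M12, M13, myRepl, List.cons_prefix_cons]
theorem Scan_pat8 (t : List Char) : pvScan (['\\', 's', 'i', 'm'] ++ t) = ['~'] ++ pvScan t := by
  rw [show ['\\', 's', 'i', 'm'] ++ t = '\\' :: 's' :: 'i' :: 'm' :: t from rfl]
  simp [pvScan, pvTable, List.cons_prefix_cons]

theorem AC_pat9 (t : List Char) : AC (['\\', 'l', 'e'] ++ t) = ['<', '='] ++ AC t := by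
  simp [AC, M1, M2, M3, M4, M5, M6, M7, M8, M9, M10, M11, M12, M13, myRepl, List.cons_prefix_cons]
theorem Scan_pat9 (t : List Char) : pvScan (['\\', 'l', 'e'] ++ t) = ['<', '='] ++ pvScan t := by
  rw [show ['\\', 'l', 'e'] ++ t = '\\' :: 'l' :: 'e' :: t from rfl]
  simp [pvScan, pvTable, List.cons_prefix_cons]

theorem AC_pat10 (t : List Char) : AC (['\\', 'g', 'e'] ++ t) = ['>', '='] ++ AC t := by
  simp [AC, M1, M2, M3, M4, M5, M6, M7, M8, M9, M10, M11, M12, M13, myRepl, List.cons_prefix_cons]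
theorem Scan_pat10 (t : List Char) : pvScan (['\\', 'g', 'e'] ++ t) = ['>', '='] ++ pvScan t := by
  rw [show ['\\', 'g', 'e'] ++ t = '\\' :: 'g' :: 'e' :: t from rfl]
  simp [pvScan, pvTable, List.cons_prefix_cons]

theorem AC_pat11 (t : List Char) : AC (['\\', 'i', 'n'] ++ t) = ['i', 'n'] ++ AC t := by
  simp [AC, M1, M2, M3, M4, M5, M6, M7, M8, M9, M10, M11, M12, M13, myRepl, List.cons_prefix_cons]
theorem Scan_pat11 (t : List Char) : pvScan (['\\', 'i', 'n'] ++ t) = ['i', 'n'] ++ pvScan t := by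
  rw [show ['\\', 'i', 'n'] ++ t = '\\' :: 'i' :: 'n' :: t from rfl]
  simp [pvScan, pvTable, List.cons_prefix_cons]

theorem AC_pat12 (t : List Char) : AC (['\\', 'c', 'd', 'o', 't'] ++ t) = ['.'] ++ AC t := by
  simp [AC, M1, M2, M3, M4, M5, M6, M7, M8, M9, M10, M11, M12, M13, myRepl, List.cons_prefix_cons]
theorem Scan_pat12 (t : List Char) : pvScan (['\\', 'c', 'd', 'o', 't'] ++ t) = ['.'] ++ pvScan t := by
  rw [show ['\\', 'c', 'd', 'o', 't'] ++ t = '\\' :: 'c' :: 'd' :: 'o' :: 't' :: t from rfl]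
  simp [pvScan, pvTable, List.cons_prefix_cons]

theorem AC_pat13 (t : List Char) : AC (['\\', 'f', 'o', 'r', 'a', 'l', 'l'] ++ t) = ['F', 'o', 'r', ' ', 'a', 'l', 'l'] ++ AC t := by
  simp [AC, M1, M2, M3, M4, M5, M6, M7, M8, M9, M10, M11, M12, M13, myRepl, List.cons_prefix_cons]
theorem Scan_pat13 (t : List Char) : pvScan (['\\', 'f', 'o', 'r', 'a', 'l', 'l'] ++ t) = ['F', 'o', 'r', ' ', 'a', 'l', 'l'] ++ pvScan t := by
  rw [show ['\\', 'f', 'o', 'r', 'a', 'l', 'l'] ++ t = '\\' :: 'f' :: 'o' :: 'r' :: 'a' :: 'l' :: 'l' :: t from rfl]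
  simp [pvScan, pvTable, List.cons_prefix_cons]

theorem AC_lb (t : List Char) : AC ('{' :: t) = AC t := by
  simp [AC, M1, M2, M3, M4, M5, M6, M7, M8, M9, M10, M11, M12, M13, myRepl, List.cons_prefix_cons]
theorem Scan_lb (t : List Char) : pvScan ('{' :: t) = pvScan t := by
  simp [pvScan, pvTable, List.cons_prefix_cons]

theorem AC_rb (t : List Char) : AC ('}' :: t) = AC t := by
  simp [AC, M1, M2, M3, M4, M5, M6, M7, M8, M9, M10, M11, M12, M13, myRepl, List.cons_prefix_cons]
theorem Scan_rb (t : List Char) : pvScan ('}' :: t) = pvScan t := by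
  simp [pvScan, pvTable, List.cons_prefix_cons]

theorem AC_dl (t : List Char) : AC ('$' :: t) = AC t := by
  simp [AC, M1, M2, M3, M4, M5, M6, M7, M8, M9, M10, M11, M12, M13, myRepl, List.cons_prefix_cons]
theorem Scan_dl (t : List Char) : pvScan ('$' :: t) = pvScan t := by
  simp [pvScan, pvTable, List.cons_prefix_cons]

theorem AC_any (c : Char) (t : List Char) (hb : ¬ c = '\\') (h1 : ¬ c = '{')
    (h2 : ¬ c = '}') (h3 : ¬ c = '$') : AC (c :: t) = c :: AC t := by
  simp [AC, M1, M2, M3, M4, M5, M6, M7, M8, M9, M10, M11, M12, M13, myRepl, List.cons_prefix_cons, Ne.symm hb, Ne.symm h1, Ne.symm h2, Ne.symm h3]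

theorem Scan_any (c : Char) (t : List Char) (hb : ¬ c = '\\') (h1 : ¬ c = '{')
    (h2 : ¬ c = '}') (h3 : ¬ c = '$') : pvScan (c :: t) = c :: pvScan t := by
  simp [pvScan, pvTable, List.cons_prefix_cons, Ne.symm hb, Ne.symm h1, Ne.symm h2, Ne.symm h3]

theorem AC_bslhat (t : List Char) : AC ('\\' :: (['\\', 'h', 'a', 't', '{', '\\', 'o', 'm', 'e', 'g', 'a', '}'] ++ t)) = ['o', 'm', 'e', 'g', 'a', '_', 'h', 'a', 't'] ++ AC t := by
  simp [AC, M1, M2, M3, M4, M5, M6, M7, M8, M9, M10, M11, M12, M13, myRepl, List.cons_prefix_cons]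

theorem Scan_bslhat (t : List Char) : pvScan ('\\' :: (['\\', 'h', 'a', 't', '{', '\\', 'o', 'm', 'e', 'g', 'a', '}'] ++ t)) = ['o', 'm', 'e', 'g', 'a', '_', 'h', 'a', 't'] ++ pvScan t := by
  simp [pvScan, pvTable, List.cons_prefix_cons]

theorem myRepl_skip_lb (X : List Char) :
    myRepl '{' [] [] ('\\' :: X) = '\\' :: myRepl '{' [] [] X :=
  myRepl_cons_not (by simp [List.cons_prefix_cons])

theorem myRepl_skip_rb (X : List Char) :
    myRepl '}' [] [] ('\\' :: X) = '\\' :: myRepl '}' [] [] X :=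
  myRepl_cons_not (by simp [List.cons_prefix_cons])

theorem myRepl_strip_bsl (X : List Char) :
    myRepl '\\' [] [] ('\\' :: X) = myRepl '\\' [] [] X := by
  rw [myRepl, if_pos (List.cons_prefix_cons.mpr ⟨rfl, List.nil_prefix⟩)]
  simp

theorem AC_bsl (t : List Char) (g1 : ¬ ['t', 'h', 'e', 't', 'a'] <+: t) (g2 : ¬ ['p', 'h', 'i'] <+: t) (g3 : ¬ ['p', 's', 'i'] <+: t) (g4 : ¬ ['h', 'a', 't', '{', '\\', 'o', 'm', 'e', 'g', 'a', '}'] <+: t) (g5 : ¬ ['o', 'm', 'e', 'g', 'a'] <+: t) (g6 : ¬ ['m', 'a', 't', 'h', 'c', 'a', 'l', '{', 'S', '}'] <+: t) (g7 : ¬ ['m', 'a', 't', 'h', 'c', 'a', 'l', '{', 'P', '}', '_', '{', 's', 'e', 'm', '}'] <+: t) (g8 : ¬ ['s', 'i', 'm'] <+: t) (g9 : ¬ ['l', 'e'] <+: t) (g10 : ¬ ['g', 'e'] <+: t) (g11 : ¬ ['i', 'n'] <+: t) (g12 : ¬ ['c', 'd', 'o', 't'] <+: t) (g13 : ¬ ['f',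 'o', 'r', 'a', 'l', 'l'] <+: t)
    (hb4 : ¬ ['\\', 'h', 'a', 't', '{', '\\', 'o', 'm', 'e', 'g', 'a', '}'] <+: t) (hcd : ¬ (['c', 'd', 'o'] ++ ['\\', 't', 'h', 'e', 't', 'a']) <+: t) :
    AC ('\\' :: t) = AC t := by
  have HB : ¬ ['\\', 'h', 'a', 't', '{', '\\', 'o', 'm', 'e', 'g', 'a', '}'] <+: (myRepl '\\' ['p', 's', 'i'] ['p', 's', 'i'] (myRepl '\\' ['p', 'h', 'i'] ['p', 'h', 'i'] (myRepl '\\' ['t', 'h', 'e', 't', 'a'] ['t', 'h', 'e', 't', 'a'] (t)))) := pres1 _ (le_refl _) (by decide) (pres1 _ (le_refl _) (by decide) (pres1 _ (le_refl _) (by decide) hb4))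
  have F1 : ¬ ['t', 'h', 'e', 't', 'a'] <+: (t) := g1
  have F2 : ¬ ['p', 'h', 'i'] <+: (myRepl '\\' ['t', 'h', 'e', 't', 'a'] ['t', 'h', 'e', 't', 'a'] (t)) := pres1 _ (le_refl _) (by decide) (g2)
  have F3 : ¬ ['p', 's', 'i'] <+: (myRepl '\\' ['p', 'h', 'i'] ['p', 'h', 'i'] (myRepl '\\' ['t', 'h', 'e', 't', 'a'] ['t', 'h', 'e', 't', 'a'] (t))) := pres1 _ (le_refl _) (by decide) (pres1 _ (le_refl _) (by decide) (g3))
  have F4 : ¬ ['h', 'a', 't', '{', '\\', 'o', 'm', 'e', 'g', 'a', '}'] <+: (myRepl '\\' ['p', 's', 'i'] ['p', 's', 'i'] (myRepl '\\' ['p', 'h', 'i'] ['p', 'h', 'i'] (myRepl '\\' ['t', 'h', 'e', 't', 'a'] ['t', 'h', 'e', 't', 'a'] (t)))) := pres1 _ (le_refl _) (by decide) (pres1 _ (le_refl _) (by decide) (pres1 _ (le_refl _) (by decide) (g4)))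
  have F5 : ¬ ['o', 'm', 'e', 'g', 'a'] <+: (myRepl '\\' ['h', 'a', 't', '{', '\\', 'o', 'm', 'e', 'g', 'a', '}'] ['o', 'm', 'e', 'g', 'a', '_', 'h', 'a', 't'] (myRepl '\\' ['p', 's', 'i'] ['p', 's', 'i'] (myRepl '\\' ['p', 'h', 'i'] ['p', 'h', 'i'] (myRepl '\\' ['t', 'h', 'e', 't', 'a'] ['t', 'h', 'e', 't', 'a'] (t))))) := pres2 (by decide) HB (pres1 _ (le_refl _) (by decide) (pres1 _ (le_refl _) (by decide) (pres1 _ (le_refl _) (by decide) (g5))))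
  have F6 : ¬ ['m', 'a', 't', 'h', 'c', 'a', 'l', '{', 'S', '}'] <+: (myRepl '\\' ['o', 'm', 'e', 'g', 'a'] ['o', 'm', 'e', 'g', 'a'] (myRepl '\\' ['h', 'a', 't', '{', '\\', 'o', 'm', 'e', 'g', 'a', '}'] ['o', 'm', 'e', 'g', 'a', '_', 'h', 'a', 't'] (myRepl '\\' ['p', 's', 'i'] ['p', 's', 'i'] (myRepl '\\' ['p', 'h', 'i'] ['p', 'h', 'i'] (myRepl '\\' ['t', 'h', 'e', 't', 'a'] ['t', 'h', 'e', 't', 'a'] (t)))))) := pres1 _ (le_refl _) (by decide) (pres1 _ (le_refl _) (by decide) (pres1 _ (le_refl _) (by decide) (pres1 _ (le_refl _) (by decide) (pres1 _ (le_refl _) (by decide) (g6)))))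
  have F7 : ¬ ['m', 'a', 't', 'h', 'c', 'a', 'l', '{', 'P', '}', '_', '{', 's', 'e', 'm', '}'] <+: (myRepl '\\' ['m', 'a', 't', 'h', 'c', 'a', 'l', '{', 'S', '}'] ['S'] (myRepl '\\' ['o', 'm', 'e', 'g', 'a'] ['o', 'm', 'e', 'g', 'a'] (myRepl '\\' ['h', 'a', 't', '{', '\\', 'o', 'm', 'e', 'g', 'a', '}'] ['o', 'm', 'e', 'g', 'a', '_', 'h', 'a', 't'] (myRepl '\\' ['p', 's', 'i'] ['p', 's', 'i'] (myRepl '\\' ['p', 'h', 'i'] ['p', 'h', 'i'] (myRepl '\\' ['t', 'h', 'e', 't', 'a'] ['t', 'h', 'e', 't', 'a'] (t))))))) := pres1 _ (le_refl _) (by decide) (pres1 _ (le_refl _) (by decide) (pres1 _ (le_refl _) (by decide) (pres1 _ (le_refl _) (by decide) (pres1 _ (le_refl _) (by decide) (pres1 _ (le_refl _) (by decide) (g7))))))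
  have F8 : ¬ ['s', 'i', 'm'] <+: (myRepl '\\' ['m', 'a', 't', 'h', 'c', 'a', 'l', '{', 'P', '}', '_', '{', 's', 'e', 'm', '}'] ['P', '_', 's', 'e', 'm'] (myRepl '\\' ['m', 'a', 't', 'h', 'c', 'a', 'l', '{', 'S', '}'] ['S'] (myRepl '\\' ['o', 'm', 'e', 'g', 'a'] ['o', 'm', 'e', 'g', 'a'] (myRepl '\\' ['h', 'a', 't', '{', '\\', 'o', 'm', 'e', 'g', 'a', '}'] ['o', 'm', 'e', 'g', 'a', '_', 'h', 'a', 't'] (myRepl '\\' ['p', 's', 'i'] ['p', 's', 'i'] (myRepl '\\' ['p', 'h', 'i'] ['p', 'h', 'i'] (myRepl '\\' ['t', 'h', 'e', 't', 'a'] ['t', 'h', 'e', 't', 'a'] (t)))))))) := pres1 _ (le_refl _) (by decide) (pres1 _ (le_refl _) (by decide) (pres1 _ (le_refl _) (by decide) (pres1 _ (le_refl _) (by decide) (pres1 _ (le_refl _) (by decide) (pres1 _ (le_refl _) (by decide) (pres1 _ (le_refl _) (by decide) (g8)))))))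
  have F9 : ¬ ['l', 'e'] <+: (myRepl '\\' ['s', 'i', 'm'] ['~'] (myRepl '\\' ['m', 'a', 't', 'h', 'c', 'a', 'l', '{', 'P', '}', '_', '{', 's', 'e', 'm', '}'] ['P', '_', 's', 'e', 'm'] (myRepl '\\' ['m', 'a', 't', 'h', 'c', 'a', 'l', '{', 'S', '}'] ['S'] (myRepl '\\' ['o', 'm', 'e', 'g', 'a'] ['o', 'm', 'e', 'g', 'a'] (myRepl '\\' ['h', 'a', 't', '{', '\\', 'o', 'm', 'e', 'g', 'a', '}'] ['o', 'm', 'e', 'g', 'a', '_', 'h', 'a', 't'] (myRepl '\\' ['p', 's', 'i'] ['p', 's', 'i'] (myRepl '\\' ['p', 'h', 'i'] ['p', 'h', 'i'] (myRepl '\\' ['t', 'h', 'e', 't', 'a'] ['t', 'h', 'e', 't', 'a'] (t))))))))) := pres1 _ (le_refl _) (by decide) (pres1 _ (le_refl _) (by decide) (pres1 _ (le_refl _) (by decide) (pres1 _ (le_refl _) (by decide) (pres1 _ (le_refl _) (by decide) (pres1 _ (le_refl _) (by decide) (pres1 _ (le_refl _) (by decide) (pres1 _ (le_refl _) (by decide)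 (g9))))))))
  have F10 : ¬ ['g', 'e'] <+: (myRepl '\\' ['l', 'e'] ['<', '='] (myRepl '\\' ['s', 'i', 'm'] ['~'] (myRepl '\\' ['m', 'a', 't', 'h', 'c', 'a', 'l', '{', 'P', '}', '_', '{', 's', 'e', 'm', '}'] ['P', '_', 's', 'e', 'm'] (myRepl '\\' ['m', 'a', 't', 'h', 'c', 'a', 'l', '{', 'S', '}'] ['S'] (myRepl '\\' ['o', 'm', 'e', 'g', 'a'] ['o', 'm', 'e', 'g', 'a'] (myRepl '\\' ['h', 'a', 't', '{', '\\', 'o', 'm', 'e', 'g', 'a', '}'] ['o', 'm', 'e', 'g', 'a', '_', 'h', 'a', 't'] (myRepl '\\' ['p', 's', 'i'] ['p', 's', 'i'] (myRepl '\\' ['p', 'h', 'i'] ['p', 'h', 'i'] (myRepl '\\' ['t', 'h', 'e', 't', 'a'] ['t', 'h', 'e', 't', 'a'] (t)))))))))) := pres1 _ (le_refl _) (by decide) (pres1 _ (le_refl _) (by decide) (pres1 _ (le_refl _) (by decide) (pres1 _ (le_refl _) (by decide) (pres1 _ (le_refl _) (by decide) (pres1 _ (le_refl _) (by decide) (pres1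 _ (le_refl _) (by decide) (pres1 _ (le_refl _) (by decide) (pres1 _ (le_refl _) (by decide) (g10)))))))))
  have F11 : ¬ ['i', 'n'] <+: (myRepl '\\' ['g', 'e'] ['>', '='] (myRepl '\\' ['l', 'e'] ['<', '='] (myRepl '\\' ['s', 'i', 'm'] ['~'] (myRepl '\\' ['m', 'a', 't', 'h', 'c', 'a', 'l', '{', 'P', '}', '_', '{', 's', 'e', 'm', '}'] ['P', '_', 's', 'e', 'm'] (myRepl '\\' ['m', 'a', 't', 'h', 'c', 'a', 'l', '{', 'S', '}'] ['S'] (myRepl '\\' ['o', 'm', 'e', 'g', 'a'] ['o', 'm', 'e', 'g', 'a'] (myRepl '\\' ['h', 'a', 't', '{', '\\', 'o', 'm', 'e', 'g', 'a', '}'] ['o', 'm', 'e', 'g', 'a', '_', 'h', 'a', 't'] (myRepl '\\' ['p', 's', 'i'] ['p', 's', 'i'] (myRepl '\\' ['p', 'h', 'i'] ['p', 'h', 'i'] (myRepl '\\' ['t', 'h', 'e', 't', 'a'] ['t', 'h', 'e', 't', 'a'] (t))))))))))) := pres1 _ (le_refl _) (by decide) (pres1 _ (le_refl _) (by decide) (pres1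 _ (le_refl _) (by decide) (pres1 _ (le_refl _) (by decide) (pres1 _ (le_refl _) (by decide) (pres1 _ (le_refl _) (by decide) (pres1 _ (le_refl _) (by decide) (pres1 _ (le_refl _) (by decide) (pres1 _ (le_refl _) (by decide) (pres1 _ (le_refl _) (by decide) (g11))))))))))
  have F12 : ¬ ['c', 'd', 'o', 't'] <+: (myRepl '\\' ['i', 'n'] ['i', 'n'] (myRepl '\\' ['g', 'e'] ['>', '='] (myRepl '\\' ['l', 'e'] ['<', '='] (myRepl '\\' ['s', 'i', 'm'] ['~'] (myRepl '\\' ['m', 'a', 't', 'h', 'c', 'a', 'l', '{', 'P', '}', '_', '{', 's', 'e', 'm', '}'] ['P', '_', 's', 'e', 'm'] (myRepl '\\' ['m', 'a', 't', 'h', 'c', 'a', 'l', '{', 'S', '}'] ['S'] (myRepl '\\' ['o', 'm', 'e', 'g', 'a'] ['o', 'm', 'e', 'g', 'a'] (myRepl '\\' ['h', 'a', 't', '{', '\\', 'o', 'm', 'e', 'g', 'a', '}'] ['o', 'm', 'e', 'g', 'a', '_', 'h', 'a', 't'] (myRepl '\\' ['p', 's', 'i'] ['p', 's', 'i'] (myRepl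 '\\' ['p', 'h', 'i'] ['p', 'h', 'i'] (myRepl '\\' ['t', 'h', 'e', 't', 'a'] ['t', 'h', 'e', 't', 'a'] (t)))))))))))) := pres1 _ (le_refl _) (by decide) (pres1 _ (le_refl _) (by decide) (pres1 _ (le_refl _) (by decide) (pres1 _ (le_refl _) (by decide) (pres1 _ (le_refl _) (by decide) (pres1 _ (le_refl _) (by decide) (pres1 _ (le_refl _) (by decide) (pres1 _ (le_refl _) (by decide) (pres1 _ (le_refl _) (by decide) (pres1 _ (le_refl _) (by decide) (pres_cdot g12 hcd))))))))))
  have F13 : ¬ ['f', 'o', 'r', 'a', 'l', 'l'] <+: (myRepl '\\' ['c', 'd', 'o', 't'] ['.'] (myRepl '\\' ['i', 'n'] ['i', 'n'] (myRepl '\\' ['g', 'e'] ['>', '='] (myRepl '\\' ['l', 'e'] ['<', '='] (myRepl '\\' ['s', 'i', 'm'] ['~'] (myRepl '\\' ['m', 'a', 't', 'h', 'c', 'a', 'l', '{', 'P', '}', '_', '{', 's', 'e', 'm', '}'] ['P', '_', 's', 'e', 'm'] (myRepl '\\' ['m', 'a', 't', 'h', 'c', 'a', 'l', '{', 'S', '}']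 ['S'] (myRepl '\\' ['o', 'm', 'e', 'g', 'a'] ['o', 'm', 'e', 'g', 'a'] (myRepl '\\' ['h', 'a', 't', '{', '\\', 'o', 'm', 'e', 'g', 'a', '}'] ['o', 'm', 'e', 'g', 'a', '_', 'h', 'a', 't'] (myRepl '\\' ['p', 's', 'i'] ['p', 's', 'i'] (myRepl '\\' ['p', 'h', 'i'] ['p', 'h', 'i'] (myRepl '\\' ['t', 'h', 'e', 't', 'a'] ['t', 'h', 'e', 't', 'a'] (t))))))))))))) := pres1 _ (le_refl _) (by decide) (pres1 _ (le_refl _) (by decide) (pres1 _ (le_refl _) (by decide) (pres1 _ (le_refl _) (by decide) (pres1 _ (le_refl _) (by decide) (pres1 _ (le_refl _) (by decide) (pres1 _ (le_refl _) (by decide) (pres1 _ (le_refl _) (by decide) (pres1 _ (le_refl _) (by decide) (pres1 _ (le_refl _) (by decide) (pres1 _ (le_refl _) (by decide) (pres1 _ (le_refl _) (by decide) (g13))))))))))))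
  have e1 : myRepl '\\' ['t', 'h', 'e', 't', 'a'] ['t', 'h', 'e', 't', 'a'] ('\\' :: (t)) = '\\' :: (myRepl '\\' ['t', 'h', 'e', 't', 'a'] ['t', 'h', 'e', 't', 'a'] (t)) :=
    myRepl_cons_not (fun hx => F1 (List.cons_prefix_cons.mp hx).2)
  have e2 : myRepl '\\' ['p', 'h', 'i'] ['p', 'h', 'i'] ('\\' :: (myRepl '\\' ['t', 'h', 'e', 't', 'a'] ['t', 'h', 'e', 't', 'a'] (t))) = '\\' :: (myRepl '\\' ['p', 'h', 'i'] ['p', 'h', 'i'] (myRepl '\\' ['t', 'h', 'e', 't', 'a'] ['t', 'h', 'e', 't', 'a'] (t))) :=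
    myRepl_cons_not (fun hx => F2 (List.cons_prefix_cons.mp hx).2)
  have e3 : myRepl '\\' ['p', 's', 'i'] ['p', 's', 'i'] ('\\' :: (myRepl '\\' ['p', 'h', 'i'] ['p', 'h', 'i'] (myRepl '\\' ['t', 'h', 'e', 't', 'a'] ['t', 'h', 'e', 't', 'a'] (t)))) = '\\' :: (myRepl '\\' ['p', 's', 'i'] ['p', 's', 'i'] (myRepl '\\' ['p', 'h', 'i'] ['p', 'h', 'i'] (myRepl '\\' ['t', 'h', 'e', 't', 'a'] ['t', 'h', 'e', 't', 'a'] (t)))) :=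
    myRepl_cons_not (fun hx => F3 (List.cons_prefix_cons.mp hx).2)
  have e4 : myRepl '\\' ['h', 'a', 't', '{', '\\', 'o', 'm', 'e', 'g', 'a', '}'] ['o', 'm', 'e', 'g', 'a', '_', 'h', 'a', 't'] ('\\' :: (myRepl '\\' ['p', 's', 'i'] ['p', 's', 'i'] (myRepl '\\' ['p', 'h', 'i'] ['p', 'h', 'i'] (myRepl '\\' ['t', 'h', 'e', 't', 'a'] ['t', 'h', 'e', 't', 'a'] (t))))) = '\\' :: (myRepl '\\' ['h', 'a', 't', '{', '\\', 'o', 'm', 'e', 'g', 'a', '}'] ['o', 'm', 'e', 'g', 'a', '_', 'h', 'a', 't'] (myRepl '\\' ['p', 's', 'i'] ['p', 's', 'i'] (myRepl '\\' ['p', 'h', 'i'] ['p', 'h', 'i'] (myRepl '\\' ['t', 'h', 'e', 't', 'a'] ['t', 'h', 'e', 't', 'a'] (t))))) :=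
    myRepl_cons_not (fun hx => F4 (List.cons_prefix_cons.mp hx).2)
  have e5 : myRepl '\\' ['o', 'm', 'e', 'g', 'a'] ['o', 'm', 'e', 'g', 'a'] ('\\' :: (myRepl '\\' ['h', 'a', 't', '{', '\\', 'o', 'm', 'e', 'g', 'a', '}'] ['o', 'm', 'e', 'g', 'a', '_', 'h', 'a', 't'] (myRepl '\\' ['p', 's', 'i'] ['p', 's', 'i'] (myRepl '\\' ['p', 'h', 'i'] ['p', 'h', 'i'] (myRepl '\\' ['t', 'h', 'e', 't', 'a'] ['t', 'h', 'e', 't', 'a'] (t)))))) = '\\' :: (myRepl '\\' ['o', 'm', 'e', 'g', 'a'] ['o', 'm', 'e', 'g', 'a'] (myRepl '\\' ['h', 'a', 't', '{', '\\', 'o', 'm', 'e', 'g', 'a', '}'] ['o', 'm', 'e', 'g', 'a', '_', 'h', 'a', 't'] (myRepl '\\' ['p', 's', 'i'] ['p', 's', 'i'] (myRepl '\\' ['p', 'h', 'i'] ['p', 'h', 'i'] (myRepl '\\' ['t', 'h', 'e', 't', 'a'] ['t', 'h', 'e', 't', 'a'] (t)))))) :=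
    myRepl_cons_not (fun hx => F5 (List.cons_prefix_cons.mp hx).2)
  have e6 : myRepl '\\' ['m', 'a', 't', 'h', 'c', 'a', 'l', '{', 'S', '}'] ['S'] ('\\' :: (myRepl '\\' ['o', 'm', 'e', 'g', 'a'] ['o', 'm', 'e', 'g', 'a'] (myRepl '\\' ['h', 'a', 't', '{', '\\', 'o', 'm', 'e', 'g', 'a', '}'] ['o', 'm', 'e', 'g', 'a', '_', 'h', 'a', 't'] (myRepl '\\' ['p', 's', 'i'] ['p', 's', 'i'] (myRepl '\\' ['p', 'h', 'i'] ['p', 'h', 'i'] (myRepl '\\' ['t', 'h', 'e', 't', 'a'] ['t', 'h', 'e', 't', 'a'] (t))))))) = '\\' :: (myRepl '\\' ['m', 'a', 't', 'h', 'c', 'a', 'l', '{', 'S', '}'] ['S'] (myRepl '\\' ['o', 'm', 'e', 'g', 'a'] ['o', 'm', 'e', 'g', 'a'] (myRepl '\\' ['h', 'a', 't', '{', '\\', 'o', 'm', 'e', 'g', 'a', '}'] ['o', 'm', 'e', 'g', 'a', '_', 'h', 'a', 't'] (myRepl '\\' ['p', 's', 'i'] ['p', 's', 'i'] (myRepl '\\'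 ['p', 'h', 'i'] ['p', 'h', 'i'] (myRepl '\\' ['t', 'h', 'e', 't', 'a'] ['t', 'h', 'e', 't', 'a'] (t))))))) :=
    myRepl_cons_not (fun hx => F6 (List.cons_prefix_cons.mp hx).2)
  have e7 : myRepl '\\' ['m', 'a', 't', 'h', 'c', 'a', 'l', '{', 'P', '}', '_', '{', 's', 'e', 'm', '}'] ['P', '_', 's', 'e', 'm'] ('\\' :: (myRepl '\\' ['m', 'a', 't', 'h', 'c', 'a', 'l', '{', 'S', '}'] ['S'] (myRepl '\\' ['o', 'm', 'e', 'g', 'a'] ['o', 'm', 'e', 'g', 'a'] (myRepl '\\' ['h', 'a', 't', '{', '\\', 'o', 'm', 'e', 'g', 'a', '}'] ['o', 'm', 'e', 'g', 'a', '_', 'h', 'a', 't'] (myRepl '\\' ['p', 's', 'i'] ['p', 's', 'i'] (myRepl '\\' ['p', 'h', 'i'] ['p', 'h', 'i'] (myRepl '\\' ['t', 'h', 'e', 't', 'a'] ['t', 'h', 'e', 't', 'a'] (t)))))))) = '\\' :: (myRepl '\\' ['m', 'a', 't', 'h', 'c', 'a', 'l', '{', 'P', '}', '_', '{', 's', 'e',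 'm', '}'] ['P', '_', 's', 'e', 'm'] (myRepl '\\' ['m', 'a', 't', 'h', 'c', 'a', 'l', '{', 'S', '}'] ['S'] (myRepl '\\' ['o', 'm', 'e', 'g', 'a'] ['o', 'm', 'e', 'g', 'a'] (myRepl '\\' ['h', 'a', 't', '{', '\\', 'o', 'm', 'e', 'g', 'a', '}'] ['o', 'm', 'e', 'g', 'a', '_', 'h', 'a', 't'] (myRepl '\\' ['p', 's', 'i'] ['p', 's', 'i'] (myRepl '\\' ['p', 'h', 'i'] ['p', 'h', 'i'] (myRepl '\\' ['t', 'h', 'e', 't', 'a'] ['t', 'h', 'e', 't', 'a'] (t)))))))) :=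
    myRepl_cons_not (fun hx => F7 (List.cons_prefix_cons.mp hx).2)
  have e8 : myRepl '\\' ['s', 'i', 'm'] ['~'] ('\\' :: (myRepl '\\' ['m', 'a', 't', 'h', 'c', 'a', 'l', '{', 'P', '}', '_', '{', 's', 'e', 'm', '}'] ['P', '_', 's', 'e', 'm'] (myRepl '\\' ['m', 'a', 't', 'h', 'c', 'a', 'l', '{', 'S', '}'] ['S'] (myRepl '\\' ['o', 'm', 'e', 'g', 'a'] ['o', 'm', 'e', 'g', 'a'] (myRepl '\\' ['h', 'a', 't', '{', '\\', 'o', 'm', 'e', 'g', 'a', '}'] ['o', 'm', 'e', 'g', 'a', '_', 'h', 'a', 't'] (myRepl '\\' ['p', 's', 'i'] ['p', 's', 'i'] (myRepl '\\' ['p', 'h', 'i'] ['p', 'h', 'i'] (myRepl '\\' ['t', 'h', 'e', 't', 'a'] ['t', 'h', 'e', 't', 'a'] (t))))))))) = '\\' :: (myRepl '\\' ['s', 'i', 'm'] ['~'] (myRepl '\\' ['m', 'a', 't', 'h', 'c', 'a', 'l', '{', 'P', '}', '_', '{', 's', 'e', 'm', '}'] ['P', '_', 's', 'e', 'm'] (myRepl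 '\\' ['m', 'a', 't', 'h', 'c', 'a', 'l', '{', 'S', '}'] ['S'] (myRepl '\\' ['o', 'm', 'e', 'g', 'a'] ['o', 'm', 'e', 'g', 'a'] (myRepl '\\' ['h', 'a', 't', '{', '\\', 'o', 'm', 'e', 'g', 'a', '}'] ['o', 'm', 'e', 'g', 'a', '_', 'h', 'a', 't'] (myRepl '\\' ['p', 's', 'i'] ['p', 's', 'i'] (myRepl '\\' ['p', 'h', 'i'] ['p', 'h', 'i'] (myRepl '\\' ['t', 'h', 'e', 't', 'a'] ['t', 'h', 'e', 't', 'a'] (t))))))))) :=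
    myRepl_cons_not (fun hx => F8 (List.cons_prefix_cons.mp hx).2)
  have e9 : myRepl '\\' ['l', 'e'] ['<', '='] ('\\' :: (myRepl '\\' ['s', 'i', 'm'] ['~'] (myRepl '\\' ['m', 'a', 't', 'h', 'c', 'a', 'l', '{', 'P', '}', '_', '{', 's', 'e', 'm', '}'] ['P', '_', 's', 'e', 'm'] (myRepl '\\' ['m', 'a', 't', 'h', 'c', 'a', 'l', '{', 'S', '}'] ['S'] (myRepl '\\' ['o', 'm', 'e', 'g', 'a'] ['o', 'm', 'e', 'g', 'a'] (myRepl '\\' ['h', 'a', 't', '{', '\\', 'o', 'm', 'e', 'g', 'a', '}'] ['o', 'm', 'e', 'g', 'a', '_', 'h', 'a', 't'] (myRepl '\\' ['p', 's', 'i'] ['p', 's', 'i'] (myRepl '\\' ['p', 'h', 'i'] ['p', 'h', 'i'] (myRepl '\\' ['t', 'h', 'e', 't', 'a'] ['t', 'h', 'e', 't', 'a'] (t)))))))))) = '\\' :: (myRepl '\\' ['l', 'e'] ['<', '='] (myRepl '\\' ['s', 'i', 'm'] ['~'] (myRepl '\\' ['m', 'a', 't', 'h', 'c', 'a', 'l',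 '{', 'P', '}', '_', '{', 's', 'e', 'm', '}'] ['P', '_', 's', 'e', 'm'] (myRepl '\\' ['m', 'a', 't', 'h', 'c', 'a', 'l', '{', 'S', '}'] ['S'] (myRepl '\\' ['o', 'm', 'e', 'g', 'a'] ['o', 'm', 'e', 'g', 'a'] (myRepl '\\' ['h', 'a', 't', '{', '\\', 'o', 'm', 'e', 'g', 'a', '}'] ['o', 'm', 'e', 'g', 'a', '_', 'h', 'a', 't'] (myRepl '\\' ['p', 's', 'i'] ['p', 's', 'i'] (myRepl '\\' ['p', 'h', 'i'] ['p', 'h', 'i'] (myRepl '\\' ['t', 'h', 'e', 't', 'a'] ['t', 'h', 'e', 't', 'a'] (t)))))))))) :=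
    myRepl_cons_not (fun hx => F9 (List.cons_prefix_cons.mp hx).2)
  have e10 : myRepl '\\' ['g', 'e'] ['>', '='] ('\\' :: (myRepl '\\' ['l', 'e'] ['<', '='] (myRepl '\\' ['s', 'i', 'm'] ['~'] (myRepl '\\' ['m', 'a', 't', 'h', 'c', 'a', 'l', '{', 'P', '}', '_', '{', 's', 'e', 'm', '}'] ['P', '_', 's', 'e', 'm'] (myRepl '\\' ['m', 'a', 't', 'h', 'c', 'a', 'l', '{', 'S', '}'] ['S'] (myRepl '\\' ['o', 'm', 'e', 'g', 'a'] ['o', 'm', 'e', 'g', 'a'] (myRepl '\\' ['h', 'a', 't', '{', '\\', 'o', 'm', 'e', 'g', 'a', '}'] ['o', 'm', 'e', 'g', 'a', '_', 'h', 'a', 't'] (myRepl '\\' ['p', 's', 'i'] ['p', 's', 'i'] (myRepl '\\' ['p', 'h', 'i'] ['p', 'h', 'i'] (myRepl '\\' ['t', 'h', 'e', 't', 'a'] ['t', 'h', 'e', 't', 'a'] (t))))))))))) = '\\' :: (myRepl '\\' ['g', 'e'] ['>', '='] (myRepl '\\' ['l', 'e'] ['<', '='] (myRepl '\\' ['s',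 'i', 'm'] ['~'] (myRepl '\\' ['m', 'a', 't', 'h', 'c', 'a', 'l', '{', 'P', '}', '_', '{', 's', 'e', 'm', '}'] ['P', '_', 's', 'e', 'm'] (myRepl '\\' ['m', 'a', 't', 'h', 'c', 'a', 'l', '{', 'S', '}'] ['S'] (myRepl '\\' ['o', 'm', 'e', 'g', 'a'] ['o', 'm', 'e', 'g', 'a'] (myRepl '\\' ['h', 'a', 't', '{', '\\', 'o', 'm', 'e', 'g', 'a', '}'] ['o', 'm', 'e', 'g', 'a', '_', 'h', 'a', 't'] (myRepl '\\' ['p', 's', 'i'] ['p', 's', 'i'] (myRepl '\\' ['p', 'h', 'i'] ['p', 'h', 'i'] (myRepl '\\' ['t', 'h', 'e', 't', 'a'] ['t', 'h', 'e', 't', 'a'] (t))))))))))) :=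
    myRepl_cons_not (fun hx => F10 (List.cons_prefix_cons.mp hx).2)
  have e11 : myRepl '\\' ['i', 'n'] ['i', 'n'] ('\\' :: (myRepl '\\' ['g', 'e'] ['>', '='] (myRepl '\\' ['l', 'e'] ['<', '='] (myRepl '\\' ['s', 'i', 'm'] ['~'] (myRepl '\\' ['m', 'a', 't', 'h', 'c', 'a', 'l', '{', 'P', '}', '_', '{', 's', 'e', 'm', '}'] ['P', '_', 's', 'e', 'm'] (myRepl '\\' ['m', 'a', 't', 'h', 'c', 'a', 'l', '{', 'S', '}'] ['S'] (myRepl '\\' ['o', 'm', 'e', 'g', 'a'] ['o', 'm', 'e', 'g', 'a'] (myRepl '\\' ['h', 'a', 't', '{', '\\', 'o', 'm', 'e', 'g', 'a', '}'] ['o', 'm', 'e', 'g', 'a', '_', 'h', 'a', 't'] (myRepl '\\' ['p', 's', 'i'] ['p', 's', 'i'] (myRepl '\\' ['p', 'h', 'i'] ['p', 'h', 'i'] (myRepl '\\' ['t', 'h', 'e', 't', 'a'] ['t', 'h', 'e', 't', 'a'] (t)))))))))))) = '\\' :: (myRepl '\\' ['i', 'n'] ['i', 'n'] (myRepl '\\'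 ['g', 'e'] ['>', '='] (myRepl '\\' ['l', 'e'] ['<', '='] (myRepl '\\' ['s', 'i', 'm'] ['~'] (myRepl '\\' ['m', 'a', 't', 'h', 'c', 'a', 'l', '{', 'P', '}', '_', '{', 's', 'e', 'm', '}'] ['P', '_', 's', 'e', 'm'] (myRepl '\\' ['m', 'a', 't', 'h', 'c', 'a', 'l', '{', 'S', '}'] ['S'] (myRepl '\\' ['o', 'm', 'e', 'g', 'a'] ['o', 'm', 'e', 'g', 'a'] (myRepl '\\' ['h', 'a', 't', '{', '\\', 'o', 'm', 'e', 'g', 'a', '}'] ['o', 'm', 'e', 'g', 'a', '_', 'h', 'a', 't'] (myRepl '\\' ['p', 's', 'i'] ['p', 's', 'i'] (myRepl '\\' ['p', 'h', 'i'] ['p', 'h', 'i'] (myRepl '\\' ['t', 'h', 'e', 't', 'a'] ['t', 'h', 'e', 't', 'a'] (t)))))))))))) :=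
    myRepl_cons_not (fun hx => F11 (List.cons_prefix_cons.mp hx).2)
  have e12 : myRepl '\\' ['c', 'd', 'o', 't'] ['.'] ('\\' :: (myRepl '\\' ['i', 'n'] ['i', 'n'] (myRepl '\\' ['g', 'e'] ['>', '='] (myRepl '\\' ['l', 'e'] ['<', '='] (myRepl '\\' ['s', 'i', 'm'] ['~'] (myRepl '\\' ['m', 'a', 't', 'h', 'c', 'a', 'l', '{', 'P', '}', '_', '{', 's', 'e', 'm', '}'] ['P', '_', 's', 'e', 'm'] (myRepl '\\' ['m', 'a', 't', 'h', 'c', 'a', 'l', '{', 'S', '}'] ['S'] (myRepl '\\' ['o', 'm', 'e', 'g', 'a'] ['o', 'm', 'e', 'g', 'a'] (myRepl '\\' ['h', 'a', 't', '{', '\\', 'o', 'm', 'e', 'g', 'a', '}'] ['o', 'm', 'e', 'g', 'a', '_', 'h', 'a', 't'] (myRepl '\\' ['p', 's', 'i'] ['p', 's', 'i'] (myRepl '\\' ['p', 'h', 'i'] ['p', 'h', 'i'] (myRepl '\\' ['t', 'h', 'e', 't', 'a'] ['t', 'h', 'e', 't', 'a'] (t))))))))))))) = '\\' :: (myRepl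 '\\' ['c', 'd', 'o', 't'] ['.'] (myRepl '\\' ['i', 'n'] ['i', 'n'] (myRepl '\\' ['g', 'e'] ['>', '='] (myRepl '\\' ['l', 'e'] ['<', '='] (myRepl '\\' ['s', 'i', 'm'] ['~'] (myRepl '\\' ['m', 'a', 't', 'h', 'c', 'a', 'l', '{', 'P', '}', '_', '{', 's', 'e', 'm', '}'] ['P', '_', 's', 'e', 'm'] (myRepl '\\' ['m', 'a', 't', 'h', 'c', 'a', 'l', '{', 'S', '}'] ['S'] (myRepl '\\' ['o', 'm', 'e', 'g', 'a'] ['o', 'm', 'e', 'g', 'a'] (myRepl '\\' ['h', 'a', 't', '{', '\\', 'o', 'm', 'e', 'g', 'a', '}'] ['o', 'm', 'e', 'g', 'a', '_', 'h', 'a', 't'] (myRepl '\\' ['p', 's', 'i'] ['p', 's', 'i'] (myRepl '\\' ['p', 'h', 'i'] ['p', 'h', 'i'] (myRepl '\\' ['t', 'h', 'e', 't', 'a'] ['t', 'h', 'e', 't', 'a'] (t))))))))))))) :=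
    myRepl_cons_not (fun hx => F12 (List.cons_prefix_cons.mp hx).2)
  have e13 : myRepl '\\' ['f', 'o', 'r', 'a', 'l', 'l'] ['F', 'o', 'r', ' ', 'a', 'l', 'l'] ('\\' :: (myRepl '\\' ['c', 'd', 'o', 't'] ['.'] (myRepl '\\' ['i', 'n'] ['i', 'n'] (myRepl '\\' ['g', 'e'] ['>', '='] (myRepl '\\' ['l', 'e'] ['<', '='] (myRepl '\\' ['s', 'i', 'm'] ['~'] (myRepl '\\' ['m', 'a', 't', 'h', 'c', 'a', 'l', '{', 'P', '}', '_', '{', 's', 'e', 'm', '}'] ['P', '_', 's', 'e', 'm'] (myRepl '\\' ['m', 'a', 't', 'h', 'c', 'a', 'l', '{', 'S', '}'] ['S'] (myRepl '\\' ['o', 'm', 'e', 'g', 'a'] ['o', 'm', 'e', 'g', 'a'] (myRepl '\\' ['h', 'a', 't', '{', '\\', 'o', 'm', 'e', 'g', 'a', '}'] ['o', 'm', 'e', 'g', 'a', '_', 'h', 'a', 't'] (myRepl '\\' ['p', 's', 'i'] ['p', 's', 'i'] (myRepl '\\' ['p', 'h', 'i'] ['p', 'h', 'i'] (myRepl '\\'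 ['t', 'h', 'e', 't', 'a'] ['t', 'h', 'e', 't', 'a'] (t)))))))))))))) = '\\' :: (myRepl '\\' ['f', 'o', 'r', 'a', 'l', 'l'] ['F', 'o', 'r', ' ', 'a', 'l', 'l'] (myRepl '\\' ['c', 'd', 'o', 't'] ['.'] (myRepl '\\' ['i', 'n'] ['i', 'n'] (myRepl '\\' ['g', 'e'] ['>', '='] (myRepl '\\' ['l', 'e'] ['<', '='] (myRepl '\\' ['s', 'i', 'm'] ['~'] (myRepl '\\' ['m', 'a', 't', 'h', 'c', 'a', 'l', '{', 'P', '}', '_', '{', 's', 'e', 'm', '}'] ['P', '_', 's', 'e', 'm'] (myRepl '\\' ['m', 'a', 't', 'h', 'c', 'a', 'l', '{', 'S', '}'] ['S'] (myRepl '\\' ['o', 'm', 'e', 'g', 'a'] ['o', 'm', 'e', 'g', 'a'] (myRepl '\\' ['h', 'a', 't', '{', '\\', 'o', 'm', 'e', 'g', 'a', '}'] ['o', 'm', 'e', 'g', 'a', '_', 'h', 'a', 't'] (myRepl '\\' ['p', 's', 'i'] ['p', 's', 'i'] (myRepl '\\' ['p', 'h', 'i'] ['p', 'h', 'i'] (myRepl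 '\\' ['t', 'h', 'e', 't', 'a'] ['t', 'h', 'e', 't', 'a'] (t)))))))))))))) :=
    myRepl_cons_not (fun hx => F13 (List.cons_prefix_cons.mp hx).2)
  simp only [AC, M13, M12, M11, M10, M9, M8, M7, M6, M5, M4, M3, M2, M1]
  rw [e1, e2, e3, e4, e5, e6, e7, e8, e9, e10, e11, e12, e13]
  rw [myRepl_skip_lb, myRepl_skip_rb, myRepl_strip_bsl]

theorem Scan_bsl (t : List Char) (h1 : ¬ ['\\', 't', 'h', 'e', 't', 'a'] <+: ('\\' :: t)) (h2 : ¬ ['\\', 'p', 'h', 'i'] <+: ('\\' :: t)) (h3 : ¬ ['\\', 'p', 's', 'i'] <+: ('\\' :: t)) (h4 : ¬ ['\\', 'h', 'a', 't', '{', '\\', 'o', 'm', 'e', 'g', 'a', '}'] <+: ('\\' :: t)) (h5 : ¬ ['\\', 'o', 'm', 'e', 'g', 'a'] <+: ('\\' :: t)) (h6 : ¬ ['\\', 'm', 'a', 't', 'h', 'c', 'a', 'l', '{', 'S', '}'] <+: ('\\' :: t)) (h7 : ¬ ['\\', 'm', 'a', 't', 'h', 'c', 'a', 'l', '{', 'P',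 '}', '_', '{', 's', 'e', 'm', '}'] <+: ('\\' :: t)) (h8 : ¬ ['\\', 's', 'i', 'm'] <+: ('\\' :: t)) (h9 : ¬ ['\\', 'l', 'e'] <+: ('\\' :: t)) (h10 : ¬ ['\\', 'g', 'e'] <+: ('\\' :: t)) (h11 : ¬ ['\\', 'i', 'n'] <+: ('\\' :: t)) (h12 : ¬ ['\\', 'c', 'd', 'o', 't'] <+: ('\\' :: t)) (h13 : ¬ ['\\', 'f', 'o', 'r', 'a', 'l', 'l'] <+: ('\\' :: t)) :
    pvScan ('\\' :: t) = pvScan t := by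
  simp [pvScan, pvTable, List.cons_prefix_cons, h1, h2, h3, h4, h5, h6, h7, h8, h9, h10, h11, h12, h13]

def pvBad : List Char := ['\\', 'c', 'd', 'o', '\\', 't', 'h', 'e', 't', 'a']

theorem infix_cons_of {l t : List Char} {c : Char} (h : l <:+: t) : l <:+: (c :: t) := by
  obtain ⟨s, u, rfl⟩ := h
  exact ⟨c :: s, u, rfl⟩

theorem infix_append_right {l t : List Char} (pre : List Char) (h : l <:+: t) :
    l <:+: (pre ++ t) := by
  obtain ⟨s, u, rfl⟩ := h
  exact ⟨pre ++ s, u, by simp⟩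

theorem ACscan : ∀ (n : Nat) (s : List Char), s.length ≤ n → ¬ pvBad <:+: s → AC s = pvScan s := by
  intro n
  induction n with
  | zero =>
    intro s hl _
    match s with
    | [] => simp [AC, M1, M2, M3, M4, M5, M6, M7, M8, M9, M10, M11, M12, M13, myRepl, pvScan]
    | c :: t => simp at hl
  | succ n ih =>
    intro s hl hbad
    match s with
    | [] => simp [AC, M1, M2, M3, M4, M5, M6, M7, M8, M9, M10, M11, M12, M13, myRepl, pvScan]
    | c :: t =>
      by_cases hc : c = '\\'
      · subst hc
        by_cases H1 : ['\\', 't', 'h', 'e', 't', 'a'] <+: ('\\' :: t)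
        · obtain ⟨t', ht⟩ := H1
          rw [← ht, AC_pat1, Scan_pat1,
              ih t' (by have := congrArg List.length ht; simp at this hl; omega)
                (fun hx => hbad (by rw [← ht]; exact infix_append_right ['\\', 't', 'h', 'e', 't', 'a'] hx))]
        ·
          by_cases H2 : ['\\', 'p', 'h', 'i'] <+: ('\\' :: t)
          · obtain ⟨t', ht⟩ := H2
            rw [← ht, AC_pat2, Scan_pat2,
                ih t' (by have := congrArg List.length ht; simp at this hl; omega)
                  (fun hx => hbad (by rw [← ht]; exact infix_append_right ['\\', 'p', 'h', 'i'] hx))]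
          ·
            by_cases H3 : ['\\', 'p', 's', 'i'] <+: ('\\' :: t)
            · obtain ⟨t', ht⟩ := H3
              rw [← ht, AC_pat3, Scan_pat3,
                  ih t' (by have := congrArg List.length ht; simp at this hl; omega)
                    (fun hx => hbad (by rw [← ht]; exact infix_append_right ['\\', 'p', 's', 'i'] hx))]
            ·
              by_cases H4 : ['\\', 'h', 'a', 't', '{', '\\', 'o', 'm', 'e', 'g', 'a', '}'] <+: ('\\' :: t)
              · obtain ⟨t', ht⟩ := H4
                rw [← ht, AC_pat4, Scan_pat4,
                    ih t' (by have := congrArg List.length ht; simp at this hl; omega)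
                      (fun hx => hbad (by rw [← ht]; exact infix_append_right ['\\', 'h', 'a', 't', '{', '\\', 'o', 'm', 'e', 'g', 'a', '}'] hx))]
              ·
                by_cases H5 : ['\\', 'o', 'm', 'e', 'g', 'a'] <+: ('\\' :: t)
                · obtain ⟨t', ht⟩ := H5
                  rw [← ht, AC_pat5, Scan_pat5,
                      ih t' (by have := congrArg List.length ht; simp at this hl; omega)
                        (fun hx => hbad (by rw [← ht]; exact infix_append_right ['\\', 'o', 'm', 'e', 'g', 'a'] hx))]
                ·
                  by_cases H6 : ['\\', 'm', 'a', 't', 'h', 'c', 'a', 'l', '{', 'S', '}'] <+: ('\\' :: t)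
                  · obtain ⟨t', ht⟩ := H6
                    rw [← ht, AC_pat6, Scan_pat6,
                        ih t' (by have := congrArg List.length ht; simp at this hl; omega)
                          (fun hx => hbad (by rw [← ht]; exact infix_append_right ['\\', 'm', 'a', 't', 'h', 'c', 'a', 'l', '{', 'S', '}'] hx))]
                  ·
                    by_cases H7 : ['\\', 'm', 'a', 't', 'h', 'c', 'a', 'l', '{', 'P', '}', '_', '{', 's', 'e', 'm', '}'] <+: ('\\' :: t)
                    · obtain ⟨t', ht⟩ := H7
                      rw [← ht, AC_pat7, Scan_pat7,
                          ih t' (by have := congrArg List.length ht; simp at this hl; omega)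
                            (fun hx => hbad (by rw [← ht]; exact infix_append_right ['\\', 'm', 'a', 't', 'h', 'c', 'a', 'l', '{', 'P', '}', '_', '{', 's', 'e', 'm', '}'] hx))]
                    ·
                      by_cases H8 : ['\\', 's', 'i', 'm'] <+: ('\\' :: t)
                      · obtain ⟨t', ht⟩ := H8
                        rw [← ht, AC_pat8, Scan_pat8,
                            ih t' (by have := congrArg List.length ht; simp at this hl; omega)
                              (fun hx => hbad (by rw [← ht]; exact infix_append_right ['\\', 's', 'i', 'm'] hx))]
                      ·
                        by_cases H9 : ['\\', 'l', 'e'] <+: ('\\' :: t)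
                        · obtain ⟨t', ht⟩ := H9
                          rw [← ht, AC_pat9, Scan_pat9,
                              ih t' (by have := congrArg List.length ht; simp at this hl; omega)
                                (fun hx => hbad (by rw [← ht]; exact infix_append_right ['\\', 'l', 'e'] hx))]
                        ·
                          by_cases H10 : ['\\', 'g', 'e'] <+: ('\\' :: t)
                          · obtain ⟨t', ht⟩ := H10
                            rw [← ht, AC_pat10, Scan_pat10,
                                ih t' (by have := congrArg List.length ht; simp at this hl; omega)
                                  (fun hx => hbad (by rw [← ht]; exact infix_append_right ['\\', 'g', 'e'] hx))]
                          ·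
                            by_cases H11 : ['\\', 'i', 'n'] <+: ('\\' :: t)
                            · obtain ⟨t', ht⟩ := H11
                              rw [← ht, AC_pat11, Scan_pat11,
                                  ih t' (by have := congrArg List.length ht; simp at this hl; omega)
                                    (fun hx => hbad (by rw [← ht]; exact infix_append_right ['\\', 'i', 'n'] hx))]
                            ·
                              by_cases H12 : ['\\', 'c', 'd', 'o', 't'] <+: ('\\' :: t)
                              · obtain ⟨t', ht⟩ := H12
                                rw [← ht, AC_pat12, Scan_pat12,
                                    ih t' (by have := congrArg List.length ht; simp at this hl; omega)
                                      (fun hx => hbad (by rw [← ht]; exact infix_append_right ['\\', 'c', 'd', 'o', 't'] hx))]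
                              ·
                                by_cases H13 : ['\\', 'f', 'o', 'r', 'a', 'l', 'l'] <+: ('\\' :: t)
                                · obtain ⟨t', ht⟩ := H13
                                  rw [← ht, AC_pat13, Scan_pat13,
                                      ih t' (by have := congrArg List.length ht; simp at this hl; omega)
                                        (fun hx => hbad (by rw [← ht]; exact infix_append_right ['\\', 'f', 'o', 'r', 'a', 'l', 'l'] hx))]
                                ·
                                  by_cases Hhat : ['\\', 'h', 'a', 't', '{', '\\', 'o', 'm', 'e', 'g', 'a', '}'] <+: t
                                  · obtain ⟨t', ht⟩ := Hhat
                                    subst ht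
                                    rw [AC_bslhat, Scan_bslhat,
                                        ih t' (by simp at hl; omega)
                                          (fun hx => hbad (infix_cons_of (infix_append_right ['\\', 'h', 'a', 't', '{', '\\', 'o', 'm', 'e', 'g', 'a', '}'] hx)))]
                                  · have hcd : ¬ (['c', 'd', 'o'] ++ ['\\', 't', 'h', 'e', 't', 'a']) <+: t := by
                                      intro hx
                                      obtain ⟨r, hr⟩ := hx
                                      simp only [List.cons_append, List.nil_append] at hr
                                      exact hbad ⟨[], r, by simpa [pvBad] using congrArg (List.cons '\\') hr⟩
                                    have g1 : ¬ ['t', 'h', 'e', 't', 'a'] <+: t := fun hx => H1 (List.cons_prefix_cons.mpr ⟨rfl, hx⟩)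
                                    have g2 : ¬ ['p', 'h', 'i'] <+: t := fun hx => H2 (List.cons_prefix_cons.mpr ⟨rfl, hx⟩)
                                    have g3 : ¬ ['p', 's', 'i'] <+: t := fun hx => H3 (List.cons_prefix_cons.mpr ⟨rfl, hx⟩)
                                    have g4 : ¬ ['h', 'a', 't', '{', '\\', 'o', 'm', 'e', 'g', 'a', '}'] <+: t := fun hx => H4 (List.cons_prefix_cons.mpr ⟨rfl, hx⟩)
                                    have g5 : ¬ ['o', 'm', 'e', 'g', 'a'] <+: t := fun hx => H5 (List.cons_prefix_cons.mpr ⟨rfl, hx⟩)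
                                    have g6 : ¬ ['m', 'a', 't', 'h', 'c', 'a', 'l', '{', 'S', '}'] <+: t := fun hx => H6 (List.cons_prefix_cons.mpr ⟨rfl, hx⟩)
                                    have g7 : ¬ ['m', 'a', 't', 'h', 'c', 'a', 'l', '{', 'P', '}', '_', '{', 's', 'e', 'm', '}'] <+: t := fun hx => H7 (List.cons_prefix_cons.mpr ⟨rfl, hx⟩)
                                    have g8 : ¬ ['s', 'i', 'm'] <+: t := fun hx => H8 (List.cons_prefix_cons.mpr ⟨rfl, hx⟩)
                                    have g9 : ¬ ['l', 'e'] <+: t := fun hx => H9 (List.cons_prefix_cons.mpr ⟨rfl, hx⟩)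
                                    have g10 : ¬ ['g', 'e'] <+: t := fun hx => H10 (List.cons_prefix_cons.mpr ⟨rfl, hx⟩)
                                    have g11 : ¬ ['i', 'n'] <+: t := fun hx => H11 (List.cons_prefix_cons.mpr ⟨rfl, hx⟩)
                                    have g12 : ¬ ['c', 'd', 'o', 't'] <+: t := fun hx => H12 (List.cons_prefix_cons.mpr ⟨rfl, hx⟩)
                                    have g13 : ¬ ['f', 'o', 'r', 'a', 'l', 'l'] <+: t := fun hx => H13 (List.cons_prefix_cons.mpr ⟨rfl, hx⟩)
                                    rw [AC_bsl t g1 g2 g3 g4 g5 g6 g7 g8 g9 g10 g11 g12 g13 Hhat hcd,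
                                        Scan_bsl t H1 H2 H3 H4 H5 H6 H7 H8 H9 H10 H11 H12 H13,
                                        ih t (by simp at hl; omega) (fun hx => hbad (infix_cons_of hx))]
      · by_cases h1 : c = '{'
        · subst h1
          rw [AC_lb, Scan_lb, ih t (by simp at hl; omega) (fun hx => hbad (infix_cons_of hx))]
        · by_cases h2 : c = '}'
          · subst h2
            rw [AC_rb, Scan_rb, ih t (by simp at hl; omega) (fun hx => hbad (infix_cons_of hx))]
          · by_cases h3 : c = '$'
            · subst h3
              rw [AC_dl, Scan_dl, ih t (by simp at hl; omega) (fun hx => hbad (infix_cons_of hx))]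
            · rw [AC_any c t hc h1 h2 h3, Scan_any c t hc h1 h2 h3,
                  ih t (by simp at hl; omega) (fun hx => hbad (infix_cons_of hx))]

theorem AC_bad (t : List Char) :
    AC (pvBad ++ t) = '.' :: 'h' :: 'e' :: 't' :: 'a' :: AC t := by
  simp [pvBad, AC, M1, M2, M3, M4, M5, M6, M7, M8, M9, M10, M11, M12, M13, myRepl,
    List.cons_prefix_cons]

theorem Scan_bad (t : List Char) :
    pvScan (pvBad ++ t) = 'c' :: 'd' :: 'o' :: 't' :: 'h' :: 'e' :: 't' :: 'a' :: pvScan t := by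
  simp [pvBad, pvScan, pvTable, List.cons_prefix_cons]

theorem infix_append_split {l a b : List Char} (h : l <:+: a ++ b) :
    l <:+: a ∨ l <:+: b ∨ ∃ x y, x ++ y = l ∧ x ≠ [] ∧ x <:+ a ∧ y <+: b := by
  induction a generalizing l with
  | nil => right; left; simpa using h
  | cons c a' ih =>
    rw [List.cons_append] at h
    rcases List.infix_cons_iff.mp h with h1 | h1
    · rw [← List.cons_append] at h1
      rcases prefix_append_cases h1 with h2 | h2
      · left
        obtain ⟨r, hr⟩ := h2
        exact ⟨[], r, by simpa using hr⟩
      · obtain ⟨y, hy⟩ := h2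
        match y, hy with
        | [], hy => left; rw [← hy]; simp
        | y0 :: yr, hy =>
          right; right
          refine ⟨c :: a', y0 :: yr, hy, by simp, List.suffix_refl _, ?_⟩
          rw [← hy] at h1
          exact (List.prefix_append_right_inj (c :: a')).mp h1
    · rcases ih h1 with h2 | h2 | ⟨x, y, hxy, hxne, hxs, hyp⟩
      · left; exact infix_cons_of h2
      · right; left; exact h2
      · right; right; exact ⟨x, y, hxy, hxne, hxs.trans (List.suffix_cons c a'), hyp⟩

theorem badthru {p b : List Char}
    (hall : p.tails.all (fun x => x.isEmpty || !(x.isPrefixOf pvBad)) = true)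
    (hni : ¬ pvBad <:+: p) (h : pvBad <:+: p ++ b) : pvBad <:+: b := by
  rcases infix_append_split h with h1 | h1 | ⟨x, y, hxy, hxne, hxs, hyp⟩
  · exact absurd h1 hni
  · exact h1
  · exfalso
    rw [List.all_eq_true] at hall
    have := hall x ((List.mem_tails _ _).mpr hxs)
    have hxe : x.isEmpty = false := by
      cases x
      · exact absurd rfl hxne
      · rfl
    rw [hxe, Bool.false_or, Bool.not_eq_true'] at this
    exact (Bool.eq_false_iff.mp this) (List.isPrefixOf_iff_prefix.mpr ⟨y, hxy⟩)

theorem ACneq : ∀ (n : Nat) (s : List Char), s.length ≤ n → pvBad <:+: s → AC s ≠ pvScan s := by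
  intro n
  induction n with
  | zero =>
    intro s hl hbad
    match s with
    | [] => exfalso; have := hbad.length_le; simp [pvBad] at this
    | c :: t => simp at hl
  | succ n ih =>
    intro s hl hbad
    match s with
    | [] => exfalso; have := hbad.length_le; simp [pvBad] at this
    | c :: t =>
      by_cases hfront : pvBad <+: (c :: t)
      · obtain ⟨t'', ht⟩ := hfront
        rw [← ht, AC_bad, Scan_bad]
        simp
      · have hbt : pvBad <:+: t := by
          rcases List.infix_cons_iff.mp hbad with h1 | h1
          · exact absurd h1 hfront
          · exact h1
        by_cases hc : c = '\\'
        · subst hc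
          by_cases H1 : ['\\', 't', 'h', 'e', 't', 'a'] <+: ('\\' :: t)
          · obtain ⟨t', ht⟩ := H1
            rw [← ht, AC_pat1, Scan_pat1]
            intro hcon
            exact ih t' (by have := congrArg List.length ht; simp at this hl; omega)
              (badthru (p := ['\\', 't', 'h', 'e', 't', 'a']) (by decide) (by decide) (by rw [ht]; exact infix_cons_of hbt))
              (List.append_cancel_left hcon)
          ·
            by_cases H2 : ['\\', 'p', 'h', 'i'] <+: ('\\' :: t)
            · obtain ⟨t', ht⟩ := H2
              rw [← ht, AC_pat2, Scan_pat2]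
              intro hcon
              exact ih t' (by have := congrArg List.length ht; simp at this hl; omega)
                (badthru (p := ['\\', 'p', 'h', 'i']) (by decide) (by decide) (by rw [ht]; exact infix_cons_of hbt))
                (List.append_cancel_left hcon)
            ·
              by_cases H3 : ['\\', 'p', 's', 'i'] <+: ('\\' :: t)
              · obtain ⟨t', ht⟩ := H3
                rw [← ht, AC_pat3, Scan_pat3]
                intro hcon
                exact ih t' (by have := congrArg List.length ht; simp at this hl; omega)
                  (badthru (p := ['\\', 'p', 's', 'i']) (by decide) (by decide) (by rw [ht]; exact infix_cons_of hbt))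
                  (List.append_cancel_left hcon)
              ·
                by_cases H4 : ['\\', 'h', 'a', 't', '{', '\\', 'o', 'm', 'e', 'g', 'a', '}'] <+: ('\\' :: t)
                · obtain ⟨t', ht⟩ := H4
                  rw [← ht, AC_pat4, Scan_pat4]
                  intro hcon
                  exact ih t' (by have := congrArg List.length ht; simp at this hl; omega)
                    (badthru (p := ['\\', 'h', 'a', 't', '{', '\\', 'o', 'm', 'e', 'g', 'a', '}']) (by decide) (by decide) (by rw [ht]; exact infix_cons_of hbt))
                    (List.append_cancel_left hcon)
                ·
                  by_cases H5 : ['\\', 'o', 'm', 'e', 'g', 'a'] <+: ('\\' :: t)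
                  · obtain ⟨t', ht⟩ := H5
                    rw [← ht, AC_pat5, Scan_pat5]
                    intro hcon
                    exact ih t' (by have := congrArg List.length ht; simp at this hl; omega)
                      (badthru (p := ['\\', 'o', 'm', 'e', 'g', 'a']) (by decide) (by decide) (by rw [ht]; exact infix_cons_of hbt))
                      (List.append_cancel_left hcon)
                  ·
                    by_cases H6 : ['\\', 'm', 'a', 't', 'h', 'c', 'a', 'l', '{', 'S', '}'] <+: ('\\' :: t)
                    · obtain ⟨t', ht⟩ := H6
                      rw [← ht, AC_pat6, Scan_pat6]
                      intro hcon
                      exact ih t' (by have := congrArg List.length ht; simp at this hl; omega)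
                        (badthru (p := ['\\', 'm', 'a', 't', 'h', 'c', 'a', 'l', '{', 'S', '}']) (by decide) (by decide) (by rw [ht]; exact infix_cons_of hbt))
                        (List.append_cancel_left hcon)
                    ·
                      by_cases H7 : ['\\', 'm', 'a', 't', 'h', 'c', 'a', 'l', '{', 'P', '}', '_', '{', 's', 'e', 'm', '}'] <+: ('\\' :: t)
                      · obtain ⟨t', ht⟩ := H7
                        rw [← ht, AC_pat7, Scan_pat7]
                        intro hcon
                        exact ih t' (by have := congrArg List.length ht; simp at this hl; omega)
                          (badthru (p := ['\\', 'm', 'a', 't', 'h', 'c', 'a', 'l', '{', 'P', '}', '_', '{', 's', 'e', 'm', '}']) (by decide) (by decide) (by rw [ht]; exact infix_cons_of hbt))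
                          (List.append_cancel_left hcon)
                      ·
                        by_cases H8 : ['\\', 's', 'i', 'm'] <+: ('\\' :: t)
                        · obtain ⟨t', ht⟩ := H8
                          rw [← ht, AC_pat8, Scan_pat8]
                          intro hcon
                          exact ih t' (by have := congrArg List.length ht; simp at this hl; omega)
                            (badthru (p := ['\\', 's', 'i', 'm']) (by decide) (by decide) (by rw [ht]; exact infix_cons_of hbt))
                            (List.append_cancel_left hcon)
                        ·
                          by_cases H9 : ['\\', 'l', 'e'] <+: ('\\' :: t)
                          · obtain ⟨t', ht⟩ := H9
                            rw [← ht, AC_pat9, Scan_pat9]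
                            intro hcon
                            exact ih t' (by have := congrArg List.length ht; simp at this hl; omega)
                              (badthru (p := ['\\', 'l', 'e']) (by decide) (by decide) (by rw [ht]; exact infix_cons_of hbt))
                              (List.append_cancel_left hcon)
                          ·
                            by_cases H10 : ['\\', 'g', 'e'] <+: ('\\' :: t)
                            · obtain ⟨t', ht⟩ := H10
                              rw [← ht, AC_pat10, Scan_pat10]
                              intro hcon
                              exact ih t' (by have := congrArg List.length ht; simp at this hl; omega)
                                (badthru (p := ['\\', 'g', 'e']) (by decide) (by decide) (by rw [ht]; exact infix_cons_of hbt))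
                                (List.append_cancel_left hcon)
                            ·
                              by_cases H11 : ['\\', 'i', 'n'] <+: ('\\' :: t)
                              · obtain ⟨t', ht⟩ := H11
                                rw [← ht, AC_pat11, Scan_pat11]
                                intro hcon
                                exact ih t' (by have := congrArg List.length ht; simp at this hl; omega)
                                  (badthru (p := ['\\', 'i', 'n']) (by decide) (by decide) (by rw [ht]; exact infix_cons_of hbt))
                                  (List.append_cancel_left hcon)
                              ·
                                by_cases H12 : ['\\', 'c', 'd', 'o', 't'] <+: ('\\' :: t)
                                · obtain ⟨t', ht⟩ := H12
                                  rw [← ht, AC_pat12, Scan_pat12]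
                                  intro hcon
                                  exact ih t' (by have := congrArg List.length ht; simp at this hl; omega)
                                    (badthru (p := ['\\', 'c', 'd', 'o', 't']) (by decide) (by decide) (by rw [ht]; exact infix_cons_of hbt))
                                    (List.append_cancel_left hcon)
                                ·
                                  by_cases H13 : ['\\', 'f', 'o', 'r', 'a', 'l', 'l'] <+: ('\\' :: t)
                                  · obtain ⟨t', ht⟩ := H13
                                    rw [← ht, AC_pat13, Scan_pat13]
                                    intro hcon
                                    exact ih t' (by have := congrArg List.length ht; simp at this hl; omega)
                                      (badthru (p := ['\\', 'f', 'o', 'r', 'a', 'l', 'l']) (by decide) (by decide) (by rw [ht]; exact infix_cons_of hbt))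
                                      (List.append_cancel_left hcon)
                                  ·
                                    by_cases Hhat : ['\\', 'h', 'a', 't', '{', '\\', 'o', 'm', 'e', 'g', 'a', '}'] <+: t
                                    · obtain ⟨t', ht⟩ := Hhat
                                      subst ht
                                      rw [AC_bslhat, Scan_bslhat]
                                      intro hcon
                                      exact ih t' (by simp at hl; omega) (badthru (p := ['\\', 'h', 'a', 't', '{', '\\', 'o', 'm', 'e', 'g', 'a', '}']) (by decide) (by decide) hbt)
                                        (List.append_cancel_left hcon)
                                    · have hcd : ¬ (['c', 'd', 'o'] ++ ['\\', 't', 'h', 'e', 't', 'a']) <+: t := by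
                                        intro hx
                                        refine hfront ?_
                                        simp only [List.cons_append, List.nil_append] at hx
                                        exact List.cons_prefix_cons.mpr ⟨rfl, by simpa [pvBad] using hx⟩
                                      have g1 : ¬ ['t', 'h', 'e', 't', 'a'] <+: t := fun hx => H1 (List.cons_prefix_cons.mpr ⟨rfl, hx⟩)
                                      have g2 : ¬ ['p', 'h', 'i'] <+: t := fun hx => H2 (List.cons_prefix_cons.mpr ⟨rfl, hx⟩)
                                      have g3 : ¬ ['p', 's', 'i'] <+: t := fun hx => H3 (List.cons_prefix_cons.mpr ⟨rfl, hx⟩)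
                                      have g4 : ¬ ['h', 'a', 't', '{', '\\', 'o', 'm', 'e', 'g', 'a', '}'] <+: t := fun hx => H4 (List.cons_prefix_cons.mpr ⟨rfl, hx⟩)
                                      have g5 : ¬ ['o', 'm', 'e', 'g', 'a'] <+: t := fun hx => H5 (List.cons_prefix_cons.mpr ⟨rfl, hx⟩)
                                      have g6 : ¬ ['m', 'a', 't', 'h', 'c', 'a', 'l', '{', 'S', '}'] <+: t := fun hx => H6 (List.cons_prefix_cons.mpr ⟨rfl, hx⟩)
                                      have g7 : ¬ ['m', 'a', 't', 'h', 'c', 'a', 'l', '{', 'P', '}', '_', '{', 's', 'e', 'm', '}'] <+: t := fun hx => H7 (List.cons_prefix_cons.mpr ⟨rfl, hx⟩)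
                                      have g8 : ¬ ['s', 'i', 'm'] <+: t := fun hx => H8 (List.cons_prefix_cons.mpr ⟨rfl, hx⟩)
                                      have g9 : ¬ ['l', 'e'] <+: t := fun hx => H9 (List.cons_prefix_cons.mpr ⟨rfl, hx⟩)
                                      have g10 : ¬ ['g', 'e'] <+: t := fun hx => H10 (List.cons_prefix_cons.mpr ⟨rfl, hx⟩)
                                      have g11 : ¬ ['i', 'n'] <+: t := fun hx => H11 (List.cons_prefix_cons.mpr ⟨rfl, hx⟩)
                                      have g12 : ¬ ['c', 'd', 'o', 't'] <+: t := fun hx => H12 (List.cons_prefix_cons.mpr ⟨rfl, hx⟩)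
                                      have g13 : ¬ ['f', 'o', 'r', 'a', 'l', 'l'] <+: t := fun hx => H13 (List.cons_prefix_cons.mpr ⟨rfl, hx⟩)
                                      rw [AC_bsl t g1 g2 g3 g4 g5 g6 g7 g8 g9 g10 g11 g12 g13 Hhat hcd,
                                          Scan_bsl t H1 H2 H3 H4 H5 H6 H7 H8 H9 H10 H11 H12 H13]
                                      exact ih t (by simp at hl; omega) hbt
        · by_cases h1 : c = '{'
          · subst h1
            rw [AC_lb, Scan_lb]
            exact ih t (by simp at hl; omega) hbt
          · by_cases h2 : c = '}'
            · subst h2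
              rw [AC_rb, Scan_rb]
              exact ih t (by simp at hl; omega) hbt
            · by_cases h3 : c = '$'
              · subst h3
                rw [AC_dl, Scan_dl]
                exact ih t (by simp at hl; omega) hbt
              · rw [AC_any c t hc h1 h2 h3, Scan_any c t hc h1 h2 h3]
                intro hcon
                exact ih t (by simp at hl; omega) hbt (List.tail_eq_of_cons_eq hcon)


-- ===== VERDICT =====
theorem clean_latex_spec : Claim_unchanged_clean_latex := by
  unfold Claim_unchanged_clean_latex
  intro text _ hnd
  have hni : ¬ pvBad <:+: text.toList := by
    intro hx
    exact hnd ((PySem.Str.isIn_iff_infix _ _).mpr (by simpa [pvBad] using hx))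
  rw [clean_latex_eq_AC, clean_latex_alt_eq, ACscan text.toList.length text.toList (le_refl _) hni]

set_option maxRecDepth 4000 in
theorem clean_latex_changed : Claim_changed_clean_latex := by
  unfold Claim_changed_clean_latex
  refine ⟨by decide, by decide, by decide, ?_, by decide⟩
  have hw : (pvDiffWitness_clean_latex).toList
      = ['\\', 'c', 'd', 'o', '\\', 't', 'h', 'e', 't', 'a'] := by decide
  rw [clean_latex_alt_eq, hw]
  simp [pvScan, pvTable, List.cons_prefix_cons]
  decide

theorem clean_latex_tight : Claim_exact_clean_latex := by
  unfold Claim_exact_clean_latex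
  intro text _ hd
  have hinf : pvBad <:+: text.toList := by
    simpa [pvBad] using (PySem.Str.isIn_iff_infix _ _).mp hd
  rw [clean_latex_eq_AC, clean_latex_alt_eq]
  intro hcon
  exact ACneq text.toList.length text.toList (le_refl _) hinf
    (by have := congrArg String.toList hcon; simpa [String.toList_ofList] using this)
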